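-- pv_equiv track=rewrite | github.com/VictorBro/Introduction_To_Algorithms_CLRS_solutions | 15_11_inventory_planning.py | plan_inventory
-- ===== SOURCE A (Python) =====
-- def h(i):
--     return i
--
-- def plan_inventory(d, D, n, m, c):
--     costs = []
--     plan = []
--
--     for i in range(n):
--         costs.append([-1] * (D + 1))
--         plan.append([-1] * (D + 1))
--
--     costs[0][0] = max(0, c * (d[0] - m))
--     for j in range(1, D + 1):
--         part_time_cost = max(0, c * (d[0] + j - m))
--         costs[0][j] = part_time_cost + h(j)
--
--     for i in range(1, n):
--         for j in range(D + 1):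
--             part_time_cost = max(0, c * (d[i] + j - m))
--             costs[i][j] = costs[i - 1][0] + part_time_cost + h(j)
--             plan[i][j] = 0
--             end = min(D + 1, d[i] + j + 1)
--             for k in range(1, end):
--                 part_time_cost = max(0, c * (d[i] + j - m - k))
--                 if costs[i][j] > costs[i - 1][k] + part_time_cost + h(j):
--                     costs[i][j] = costs[i - 1][k] + part_time_cost + h(j)
--                     plan[i][j] = k
--
--     return costs, plan
-- ===== SOURCE B (Python) =====
-- def _fwd(key, reset):
--     # prefix-style minima: out[k] = (min, least argmin) of key over [start, k],
--     # where start is the last index <= k with reset(start) (strict < keeps the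
--     # earliest minimiser)
--     out = []
--     best = (0, 0)
--     for k in range(len(key)):
--         v = key[k]
--         if reset(k) or v < best[0]:
--             best = (v, k)
--         out.append(best)
--     return out
--
--
-- def _bwd(key, reset):
--     # suffix-style minima: out[k] = (min, least argmin) of key over [k, end],
--     # where end is the first index >= k with reset(end) (non-strict <= keeps
--     # the earliest minimiser while scanning downwards)
--     out = []
--     best = (0, 0)
--     for k in range(len(key) - 1, -1, -1):
--         v = key[k]
--         if reset(k) or v <= best[0]:
--             best = (v, k)
--         out.append(best)
--     out.reverse()
--     return out
--
--
-- def plan_inventory(d, D, n, m, c):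
--     # O(n*D): the inner min over k of prev[k] + max(0, c*(d[i]+j-m-k)) is split
--     # at the kink k = d[i]+j-m into a prefix range of one key and a width-w
--     # window of the other key; precomputed prefix/suffix and block minima
--     # (block size = w) answer each cell in O(1), tracking the least argmin.
--     first = [max(0, c * (d[0] + j - m)) + j for j in range(D + 1)]
--     costs = [first]
--     plan = [[-1] * (D + 1)]
--     prev = first
--     for i in range(1, n):
--         di = d[i]
--         if c >= 0:
--             low = [prev[k] - c * k for k in range(D + 1)]
--             high = prev
--             w = m
--         else:
--             low = prev
--             high = [prev[k] - c * k for k in range(D + 1)]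
--             w = m + 1
--         Bq = w if w >= 1 else 1
--         P = _fwd(low, lambda k: k == 0)
--         F = _fwd(high, lambda k: k == 0)
--         S = _bwd(high, lambda k: k == D)
--         BP = _fwd(high, lambda k: k % Bq == 0)
--         BS = _bwd(high, lambda k: k == D or k % Bq == Bq - 1)
--         row = []
--         arg = []
--         for j in range(D + 1):
--             M = di + j
--             x = M - m
--             E = min(D, M)
--             if E < 0:
--                 E = 0
--             t = min(x, E) if c >= 0 else min(x - 1, E)
--             offl = c * x if c >= 0 else 0
--             offh = 0 if c >= 0 else c * x
--             if t < 0: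
--                 bv, bk = F[E]
--                 bv += offh
--             else:
--                 bv, bk = P[t]
--                 bv += offl
--                 a = t + 1
--                 if a <= E:
--                     if E == D:
--                         hv, hk = S[a]
--                     else:
--                         hv, hk = BS[a]
--                         pv2, pk2 = BP[E]
--                         if pv2 < hv:
--                             hv, hk = pv2, pk2
--                     hv += offh
--                     if hv < bv:
--                         bv, bk = hv, hk
--             row.append(bv + j)
--             arg.append(bk)
--         costs.append(row)
--         plan.append(arg)
--         prev = row
--     return costs, plan
-- ===== Notes on version B (the rewrite author's own statement) =====
-- stated objective: faster
-- what changed: The O(D) inner scan over previous levels k is removed: the piecewise cost max(0,c*(d[i]+j-m-k)) is split at its kink into a prefix range of one key (prev[k]-c*k or prev[k]) and a fixed-width sliding window of the other; B precomputes per row prefix/suffix and block minima with least-argmin tie-breaking and answers each cell in O(1).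
import Mathlib
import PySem

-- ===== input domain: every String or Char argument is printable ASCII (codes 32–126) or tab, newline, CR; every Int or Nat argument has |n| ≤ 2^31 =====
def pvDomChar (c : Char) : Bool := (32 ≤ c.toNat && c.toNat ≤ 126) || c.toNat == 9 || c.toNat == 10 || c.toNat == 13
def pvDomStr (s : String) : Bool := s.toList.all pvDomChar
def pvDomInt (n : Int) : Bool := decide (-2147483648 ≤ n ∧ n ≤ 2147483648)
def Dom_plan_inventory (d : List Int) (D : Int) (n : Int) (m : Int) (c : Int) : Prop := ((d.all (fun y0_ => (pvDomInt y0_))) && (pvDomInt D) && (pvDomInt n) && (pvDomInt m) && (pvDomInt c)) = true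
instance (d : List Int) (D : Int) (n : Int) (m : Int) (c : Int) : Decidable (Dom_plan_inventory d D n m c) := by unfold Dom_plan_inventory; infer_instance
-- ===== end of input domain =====

-- B replaces A's O(D) inner scan over previous levels k by an O(1) query per cell:
-- the piecewise cost max(0, c*(d[i]+j-m-k)) is split at its kink into a prefix range of
-- one key and a fixed-width window of the other, answered with precomputed prefix/suffix
-- and block minima tracking the least argmin; O(n*D) instead of O(n*D^2).
-- Return-value equivalence only (neither program mutates its arguments).

-- Python list assignment xs[j] = v with a nonnegative in-range index (the only writes
-- A performs on inputs satisfying Pre_): exact there.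
def pvSet {α : Type} (xs : List α) (i : Int) (v : α) : List α := xs.set i.toNat v

-- xs[i] read with a nonnegative in-range index (exact there; Pre_ keeps all reads in range).
def pvGetI (xs : List Int) (i : Int) : Int := PySem.List.pyGetD xs i 0

def pvRow (xss : List (List Int)) (i : Int) : List Int := PySem.List.pyGetD xss i []

def pvGet2 (xss : List (List Int)) (i j : Int) : Int := pvGetI (pvRow xss i) j

def pvSet2 (xss : List (List Int)) (i j : Int) (v : Int) : List (List Int) :=
  pvSet xss i (pvSet (pvRow xss i) j v)

-- pair-list read with a nonnegative in-range index (exact there)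
def pvGetP (xs : List (Int × Int)) (i : Int) : Int × Int := PySem.List.pyGetD xs i (0, 0)

-- ===== PORT A =====
def hA (i : Int) : Int := i

def plan_inventory (d : List Int) (D : Int) (n : Int) (m : Int) (c : Int) : List (List Int) × List (List Int) :=
  let rows : List (List Int) × List (List Int) :=
    (PySem.List.pyRange 0 n 1).foldl
      (fun (st : List (List Int) × List (List Int)) _ =>
        (st.1 ++ [List.replicate (D + 1).toNat (-1)], st.2 ++ [List.replicate (D + 1).toNat (-1)]))
      ([], [])
  let costs := rows.1
  let plan := rows.2
  let costs := pvSet2 costs 0 0 (max 0 (c * (pvGetI d 0 - m)))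
  let costs := (PySem.List.pyRange 1 (D + 1) 1).foldl
      (fun costs j => pvSet2 costs 0 j (max 0 (c * (pvGetI d 0 + j - m)) + hA j)) costs
  (PySem.List.pyRange 1 n 1).foldl
    (fun (st : List (List Int) × List (List Int)) i =>
      (PySem.List.pyRange 0 (D + 1) 1).foldl
        (fun (st : List (List Int) × List (List Int)) j =>
          let costs := pvSet2 st.1 i j (pvGet2 st.1 (i - 1) 0 + max 0 (c * (pvGetI d i + j - m)) + hA j)
          let plan := pvSet2 st.2 i j 0
          let e := min (D + 1) (pvGetI d i + j + 1)
          (PySem.List.pyRange 1 e 1).foldl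
            (fun (st : List (List Int) × List (List Int)) k =>
              let cand := pvGet2 st.1 (i - 1) k + max 0 (c * (pvGetI d i + j - m - k)) + hA j
              if pvGet2 st.1 i j > cand then (pvSet2 st.1 i j cand, pvSet2 st.2 i j k) else st)
            (costs, plan))
        st)
    (costs, plan)

-- ===== PORT B =====
-- _fwd: prefix-style running minima with least argmin (strict <), reset at reset k
def fwdScan (key : List Int) (reset : Int → Bool) : List (Int × Int) :=
  ((PySem.List.pyRange 0 (key.length : Int) 1).foldl
    (fun (st : List (Int × Int) × (Int × Int)) k =>
      let v := pvGetI key k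
      let best := if reset k || decide (v < st.2.1) then (v, k) else st.2
      (st.1 ++ [best], best)) ([], (0, 0))).1

-- _bwd: suffix-style running minima with least argmin (non-strict ≤ downwards), reset at reset k
def bwdScan (key : List Int) (reset : Int → Bool) : List (Int × Int) :=
  ((PySem.List.pyRange ((key.length : Int) - 1) (-1) (-1)).foldl
    (fun (st : List (Int × Int) × (Int × Int)) k =>
      let v := pvGetI key k
      let best := if reset k || decide (v ≤ st.2.1) then (v, k) else st.2
      (st.1 ++ [best], best)) ([], (0, 0))).1.reverse

def plan_inventory_alt (d : List Int) (D : Int) (n : Int) (m : Int) (c : Int) : List (List Int) × List (List Int) :=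
  let first : List Int :=
    (PySem.List.pyRange 0 (D + 1) 1).map (fun j => max 0 (c * (pvGetI d 0 + j - m)) + j)
  let st :=
    (PySem.List.pyRange 1 n 1).foldl
      (fun (st : List (List Int) × List (List Int) × List Int) i =>
        let prev := st.2.2
        let di := pvGetI d i
        let lhw : List Int × List Int × Int :=
          if 0 ≤ c then ((PySem.List.pyRange 0 (D + 1) 1).map (fun k => pvGetI prev k - c * k), prev, m)
          else (prev, (PySem.List.pyRange 0 (D + 1) 1).map (fun k => pvGetI prev k - c * k), m + 1)
        let low := lhw.1
        let high := lhw.2.1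
        let w := lhw.2.2
        let Bq := if 1 ≤ w then w else 1
        let P := fwdScan low (fun k => k == 0)
        let F := fwdScan high (fun k => k == 0)
        let S := bwdScan high (fun k => k == D)
        let BP := fwdScan high (fun k => PySem.Int.mod k Bq == 0)
        let BS := bwdScan high (fun k => k == D || PySem.Int.mod k Bq == Bq - 1)
        let ra :=
          (PySem.List.pyRange 0 (D + 1) 1).foldl
            (fun (ra : List Int × List Int) j =>
              let M := di + j
              let x := M - m
              let E0 := min D M
              let E := if E0 < 0 then 0 else E0
              let t := if 0 ≤ c then min x E else min (x - 1) E
              let offl := if 0 ≤ c then c * x else 0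
              let offh := if 0 ≤ c then 0 else c * x
              let bp : Int × Int :=
                if t < 0 then
                  let f := pvGetP F E
                  (f.1 + offh, f.2)
                else
                  let p := pvGetP P t
                  let bp0 : Int × Int := (p.1 + offl, p.2)
                  let a := t + 1
                  if a ≤ E then
                    let hh : Int × Int :=
                      if E == D then pvGetP S a
                      else
                        let bs := pvGetP BS a
                        let bp2 := pvGetP BP E
                        if bp2.1 < bs.1 then bp2 else bs
                    let hh' : Int × Int := (hh.1 + offh, hh.2)
                    if hh'.1 < bp0.1 then hh' else bp0
                  else bp0
              (ra.1 ++ [bp.1 + j], ra.2 ++ [bp.2]))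
            ([], [])
        (st.1 ++ [ra.1], st.2.1 ++ [ra.2], ra.1))
      ([first], [List.replicate (D + 1).toNat (-1)], first)
  (st.1, st.2.1)

-- ===== PRECONDITION & SPEC =====
-- Pre_ is exactly where the Python A returns normally: A raises IndexError when n < 1 or
-- D < 0 (costs[0][0] on an empty matrix/row) or n > len(d) (d[i]).
def Pre_plan_inventory (d : List Int) (D : Int) (n : Int) (m : Int) (c : Int) : Prop :=
  1 ≤ n ∧ n ≤ (d.length : Int) ∧ 0 ≤ D

instance (d : List Int) (D : Int) (n : Int) (m : Int) (c : Int) : Decidable (Pre_plan_inventory d D n m c) := by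
  unfold Pre_plan_inventory; infer_instance

def pvWitness_plan_inventory : List Int × Int × Int × Int × Int := ([1, 2], 2, 2, 1, 1)

def Spec_plan_inventory (d : List Int) (D : Int) (n : Int) (m : Int) (c : Int) (out : List (List Int) × List (List Int)) : Prop := out = plan_inventory_alt d D n m c
instance (d : List Int) (D : Int) (n : Int) (m : Int) (c : Int) (out : List (List Int) × List (List Int)) : Decidable (Spec_plan_inventory d D n m c out) := by unfold Spec_plan_inventory; infer_instance

-- ===== CLAIM (what is proved, stated in full; the proofs are below) =====
def Claim_equal_plan_inventory : Prop := ∀ (d : List Int) (D : Int) (n : Int) (m : Int) (c : Int), Dom_plan_inventory d D n m c → Pre_plan_inventory d D n m c → Spec_plan_inventory d D n m c (plan_inventory d D n m c)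

-- ===== LEMMAS AND PROOFS =====

-- The common cell-wise description of row i (i ≥ 1): running strict minimum with argmin.
def bestF (g : Int → Int) (ks : List Int) (p : Int × Int) : Int × Int :=
  ks.foldl (fun p k => if g k < p.1 then (g k, k) else p) p

def cellG (prev : List Int) (di m c j : Int) (k : Int) : Int :=
  pvGetI prev k + max 0 (c * (di + j - m - k)) + j

def cellV (prev : List Int) (di D m c j : Int) : Int × Int :=
  bestF (cellG prev di m c j) (PySem.List.pyRange 1 (min (D + 1) (di + j + 1)) 1)
    (cellG prev di m c j 0, 0)

def row0V (d : List Int) (D m c : Int) : List Int :=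
  (PySem.List.pyRange 0 (D + 1) 1).map (fun j => max 0 (c * (pvGetI d 0 + j - m)) + j)

def initRow (D : Int) : List Int := List.replicate (D + 1).toNat (-1)

-- canonical row-by-row builder both ports are reduced to
def buildC (d : List Int) (D m c : Int) : Nat → List (List Int) × List (List Int) × List Int
  | 0 => ([row0V d D m c], [initRow D], row0V d D m c)
  | t + 1 =>
    let s := buildC d D m c t
    let prev := s.2.2
    let i : Int := (t : Int) + 1
    let r1 := (PySem.List.pyRange 0 (D + 1) 1).map (fun j => (cellV prev (pvGetI d i) D m c j).1)
    let r2 := (PySem.List.pyRange 0 (D + 1) 1).map (fun j => (cellV prev (pvGetI d i) D m c j).2)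
    (s.1 ++ [r1], s.2.1 ++ [r2], r1)


-- ---- basic facts about Python-style indexed reads/writes ----

theorem pvGetD_nonneg {α : Type} (xs : List α) (q : Int) (dft : α) (h : 0 ≤ q) :
    PySem.List.pyGetD xs q dft = (xs[q.toNat]?).getD dft := by
  conv_lhs => rw [← Int.toNat_of_nonneg h]
  rw [PySem.List.pyGetD_natCast, List.getD_eq_getElem?_getD]

theorem pvGetD_eq_getElem {α : Type} (xs : List α) (q : Int) (dft : α) (h0 : 0 ≤ q)
    (h : q.toNat < xs.length) : PySem.List.pyGetD xs q dft = xs[q.toNat] := by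
  rw [pvGetD_nonneg xs q dft h0, List.getElem?_eq_getElem h, Option.getD_some]

theorem pvSet_length {α : Type} (xs : List α) (i : Int) (v : α) :
    (pvSet xs i v).length = xs.length := List.length_set ..

theorem pvGetD_set_self {α : Type} (xs : List α) (i : Int) (v dft : α) (h0 : 0 ≤ i)
    (h : i.toNat < xs.length) : PySem.List.pyGetD (pvSet xs i v) i dft = v := by
  rw [pvGetD_nonneg _ _ _ h0]
  simp [pvSet, List.getElem?_set_self h]

theorem pvGetD_set_ne {α : Type} (xs : List α) (i q : Int) (v dft : α) (hq : 0 ≤ q)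
    (hne : i.toNat ≠ q.toNat) :
    PySem.List.pyGetD (pvSet xs i v) q dft = PySem.List.pyGetD xs q dft := by
  rw [pvGetD_nonneg _ _ _ hq, pvGetD_nonneg _ _ _ hq]
  rw [pvSet, List.getElem?_set_ne hne]

theorem pvSet_get_self {α : Type} (xs : List α) (i : Int) (dft : α) (h0 : 0 ≤ i)
    (h : i.toNat < xs.length) : pvSet xs i (PySem.List.pyGetD xs i dft) = xs := by
  rw [pvGetD_eq_getElem xs i dft h0 h]
  exact List.set_getElem_self h

-- ---- derived facts for the 2-dimensional accessors ----

theorem pvSet2_length (C : List (List Int)) (i j : Int) (v : Int) :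
    (pvSet2 C i j v).length = C.length := List.length_set ..

theorem pvRow_pvSet2_self (C : List (List Int)) (i j : Int) (v : Int) (h0 : 0 ≤ i)
    (h : i.toNat < C.length) : pvRow (pvSet2 C i j v) i = pvSet (pvRow C i) j v :=
  pvGetD_set_self C i _ [] h0 h

theorem pvRow_pvSet2_ne (C : List (List Int)) (i q j : Int) (v : Int) (hq : 0 ≤ q)
    (hne : i.toNat ≠ q.toNat) : pvRow (pvSet2 C i j v) q = pvRow C q :=
  pvGetD_set_ne C i q _ [] hq hne

theorem pvGet2_pvSet2_self (C : List (List Int)) (i j : Int) (v : Int) (hi0 : 0 ≤ i)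
    (hj0 : 0 ≤ j) (hi : i.toNat < C.length) (hj : j.toNat < (pvRow C i).length) :
    pvGet2 (pvSet2 C i j v) i j = v := by
  unfold pvGet2
  rw [pvRow_pvSet2_self C i j v hi0 hi]
  exact pvGetD_set_self _ j v 0 hj0 hj

theorem pvGet2_pvSet2_pred (C : List (List Int)) (i j : Int) (v : Int) (hi : 1 ≤ i) (k : Int) :
    pvGet2 (pvSet2 C i j v) (i - 1) k = pvGet2 C (i - 1) k := by
  unfold pvGet2
  rw [pvRow_pvSet2_ne C i (i - 1) j v (by omega) (by omega)]

theorem pvSet2_pvSet2 (C : List (List Int)) (i j : Int) (v w : Int) (hi0 : 0 ≤ i)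
    (hi : i.toNat < C.length) : pvSet2 (pvSet2 C i j v) i j w = pvSet2 C i j w := by
  rw [show pvSet2 (pvSet2 C i j v) i j w
        = pvSet (pvSet2 C i j v) i (pvSet (pvRow (pvSet2 C i j v) i) j w) from rfl]
  rw [pvRow_pvSet2_self C i j v hi0 hi]
  unfold pvSet2 pvSet
  rw [List.set_set, List.set_set]

theorem pvSet2_get_self (C : List (List Int)) (i j : Int) (hi0 : 0 ≤ i) (hj0 : 0 ≤ j)
    (hi : i.toNat < C.length) (hj : j.toNat < (pvRow C i).length) :
    pvSet2 C i j (pvGet2 C i j) = C := by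
  unfold pvSet2 pvGet2 pvGetI
  rw [pvSet_get_self (pvRow C i) j 0 hj0 hj]
  exact pvSet_get_self C i [] hi0 hi

-- ---- generic fold-of-writes lemmas (A side) ----

theorem foldl_append_rows {α : Type} (l : List Int) (r : α) :
    ∀ (a b : List α),
      l.foldl (fun (st : List α × List α) _ => (st.1 ++ [r], st.2 ++ [r])) (a, b) =
        (a ++ List.replicate l.length r, b ++ List.replicate l.length r) := by
  induction l with
  | nil => intro a b; simp
  | cons x xs ih =>
    intro a b
    simp only [List.foldl_cons, ih (a ++ [r]) (b ++ [r]), List.length_cons]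
    simp [List.replicate_succ, List.append_assoc]

theorem foldl_set_pointwise (f : Int → Int) (js : List Int) :
    ∀ (u : List Int), (∀ j ∈ js, 0 ≤ j ∧ j.toNat < u.length) →
      ((js.foldl (fun r j => pvSet r j (f j)) u).length = u.length ∧
       ∀ q : Int, 0 ≤ q →
         pvGetI (js.foldl (fun r j => pvSet r j (f j)) u) q =
           if q ∈ js then f q else pvGetI u q) := by
  induction js with
  | nil => intro u _; simp
  | cons j js ih =>
    intro u hjs
    obtain ⟨hj0, hjlt⟩ := hjs j (by simp)
    have hlen' : (pvSet u j (f j)).length = u.length := pvSet_length ..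
    have hrec := ih (pvSet u j (f j)) (by
      intro x hx
      refine ⟨(hjs x (by simp [hx])).1, ?_⟩
      rw [hlen']; exact (hjs x (by simp [hx])).2)
    simp only [List.foldl_cons]
    refine ⟨by rw [hrec.1, hlen'], ?_⟩
    intro q hq
    rw [hrec.2 q hq]
    by_cases hmem : q ∈ js
    · simp [hmem]
    · by_cases hqj : q = j
      · subst hqj
        simp only [hmem, if_false, List.mem_cons, true_or, if_true]
        exact pvGetD_set_self u q (f q) 0 hq hjlt
      · have : q ∉ (j :: js) := by simp [hqj, hmem]
        simp only [hmem, if_false, this, if_false]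
        unfold pvGetI
        exact pvGetD_set_ne u j q (f j) 0 hq (by omega)

theorem foldl_set_full (f : Int → Int) (L : Int) (xs : List Int)
    (hlen : xs.length = L.toNat) :
    (PySem.List.pyRange 0 L 1).foldl (fun r j => pvSet r j (f j)) xs =
      (PySem.List.pyRange 0 L 1).map f := by
  have hjs : ∀ j ∈ PySem.List.pyRange 0 L 1, 0 ≤ j ∧ j.toNat < xs.length := by
    intro j hj
    rw [PySem.List.mem_pyRange_one] at hj
    exact ⟨hj.1, by omega⟩
  obtain ⟨h1, h2⟩ := foldl_set_pointwise f (PySem.List.pyRange 0 L 1) xs hjs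
  apply List.ext_getElem
  · rw [h1, hlen]; simp [PySem.List.length_pyRange_one]
  · intro p hp hp'
    have hpL : (p : Int) < L := by
      have := hp; rw [h1, hlen] at this; omega
    have hres : pvGetI ((PySem.List.pyRange 0 L 1).foldl (fun r j => pvSet r j (f j)) xs) (p : Int) = f p := by
      rw [h2 (p : Int) (by positivity)]
      simp [PySem.List.mem_pyRange_one, hpL]
    have e1 : ((PySem.List.pyRange 0 L 1).foldl (fun r j => pvSet r j (f j)) xs)[p] = f p := by
      unfold pvGetI at hres
      rw [pvGetD_eq_getElem _ ((p : Nat) : Int) 0 (by positivity) (by simpa using hp)] at hres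
      simpa using hres
    rw [e1]
    simp [PySem.List.getElem_pyRange_one]

theorem pvGetI_map_pyRange (f : Int → Int) (L q : Int) (h0 : 0 ≤ q) (hq : q < L) :
    pvGetI ((PySem.List.pyRange 0 L 1).map f) q = f q :=
  PySem.List.pyGetD_map_pyRange_of_nonneg f L q 0 h0 hq

-- ---- bestF append (shared) ----

theorem bestF_append (g : Int → Int) (ks : List Int) (k : Int) (p : Int × Int) :
    bestF g (ks ++ [k]) p = if g k < (bestF g ks p).1 then (g k, k) else bestF g ks p := by
  simp [bestF, List.foldl_append]

-- ---- A-side: scalarising the in-matrix mutation loops ----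

theorem fold_pvSet2_row (f : Int → Int) (i : Int) (hi0 : 0 ≤ i) (js : List Int) :
    ∀ C : List (List Int), i.toNat < C.length →
      js.foldl (fun C j => pvSet2 C i j (f j)) C
        = pvSet C i (js.foldl (fun r j => pvSet r j (f j)) (pvRow C i)) := by
  induction js with
  | nil =>
    intro C hC
    simp only [List.foldl_nil]
    exact (pvSet_get_self C i [] hi0 hC).symm
  | cons j js ih =>
    intro C hC
    simp only [List.foldl_cons]
    have hC' : i.toNat < (pvSet2 C i j (f j)).length := by rw [pvSet2_length]; exact hC
    rw [ih (pvSet2 C i j (f j)) hC']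
    rw [pvRow_pvSet2_self C i j (f j) hi0 hC]
    rw [show pvSet2 C i j (f j) = pvSet C i (pvSet (pvRow C i) j (f j)) from rfl]
    unfold pvSet
    rw [List.set_set]

theorem A_inner (F : Int → Int → Int) (i j : Int) (hi : 1 ≤ i) (hj : 0 ≤ j) (ks : List Int) :
    ∀ (C P : List (List Int)), i.toNat < C.length → i.toNat < P.length →
      j.toNat < (pvRow C i).length → j.toNat < (pvRow P i).length →
      ks.foldl (fun (st : List (List Int) × List (List Int)) k =>
          let cand := F (pvGet2 st.1 (i - 1) k) k
          if pvGet2 st.1 i j > cand then (pvSet2 st.1 i j cand, pvSet2 st.2 i j k) else st) (C, P)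
      = (pvSet2 C i j (ks.foldl (fun (p : Int × Int) k =>
            let cand := F (pvGet2 C (i - 1) k) k
            if p.1 > cand then (cand, k) else p) (pvGet2 C i j, pvGet2 P i j)).1,
         pvSet2 P i j (ks.foldl (fun (p : Int × Int) k =>
            let cand := F (pvGet2 C (i - 1) k) k
            if p.1 > cand then (cand, k) else p) (pvGet2 C i j, pvGet2 P i j)).2) := by
  have hi0 : (0 : Int) ≤ i := by omega
  induction ks with
  | nil =>
    intro C P hiC hiP hjC hjP
    simp only [List.foldl_nil]
    rw [pvSet2_get_self C i j hi0 hj hiC hjC, pvSet2_get_self P i j hi0 hj hiP hjP]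
  | cons k ks ih =>
    intro C P hiC hiP hjC hjP
    simp only [List.foldl_cons]
    by_cases hcond : pvGet2 C i j > F (pvGet2 C (i - 1) k) k
    · simp only [if_pos hcond]
      have hiC' : i.toNat < (pvSet2 C i j (F (pvGet2 C (i - 1) k) k)).length := by
        rw [pvSet2_length]; exact hiC
      have hiP' : i.toNat < (pvSet2 P i j k).length := by rw [pvSet2_length]; exact hiP
      have hjC' : j.toNat < (pvRow (pvSet2 C i j (F (pvGet2 C (i - 1) k) k)) i).length := by
        rw [pvRow_pvSet2_self _ i j _ hi0 hiC, pvSet_length]; exact hjC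
      have hjP' : j.toNat < (pvRow (pvSet2 P i j k) i).length := by
        rw [pvRow_pvSet2_self _ i j _ hi0 hiP, pvSet_length]; exact hjP
      rw [ih _ _ hiC' hiP' hjC' hjP']
      have hprevstable : ∀ k' : Int,
          pvGet2 (pvSet2 C i j (F (pvGet2 C (i - 1) k) k)) (i - 1) k' = pvGet2 C (i - 1) k' :=
        fun k' => pvGet2_pvSet2_pred C i j _ hi k'
      have hfun : (fun (p : Int × Int) k' =>
            let cand := F (pvGet2 (pvSet2 C i j (F (pvGet2 C (i - 1) k) k)) (i - 1) k') k'
            if p.1 > cand then (cand, k') else p)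
          = (fun (p : Int × Int) k' =>
            let cand := F (pvGet2 C (i - 1) k') k'
            if p.1 > cand then (cand, k') else p) := by
        funext p k'
        rw [hprevstable k']
      rw [hfun]
      rw [pvGet2_pvSet2_self C i j _ hi0 hj hiC hjC,
          pvGet2_pvSet2_self P i j k hi0 hj hiP hjP]
      rw [pvSet2_pvSet2 C i j _ _ hi0 hiC, pvSet2_pvSet2 P i j _ _ hi0 hiP]
    · simp only [if_neg hcond]
      rw [ih _ _ hiC hiP hjC hjP]

theorem jbody_eq (d : List Int) (D m c : Int) (i j : Int) (hi : 1 ≤ i) (hj0 : 0 ≤ j)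
    (C P : List (List Int)) (hiC : i.toNat < C.length) (hiP : i.toNat < P.length)
    (hjC : j.toNat < (pvRow C i).length) (hjP : j.toNat < (pvRow P i).length) :
    (let costs := pvSet2 C i j (pvGet2 C (i - 1) 0 + max 0 (c * (pvGetI d i + j - m)) + hA j)
     let plan := pvSet2 P i j 0
     let e := min (D + 1) (pvGetI d i + j + 1)
     (PySem.List.pyRange 1 e 1).foldl
       (fun (st : List (List Int) × List (List Int)) k =>
         let cand := pvGet2 st.1 (i - 1) k + max 0 (c * (pvGetI d i + j - m - k)) + hA j
         if pvGet2 st.1 i j > cand then (pvSet2 st.1 i j cand, pvSet2 st.2 i j k) else st)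
       (costs, plan))
    = (pvSet2 C i j (cellV (pvRow C (i - 1)) (pvGetI d i) D m c j).1,
       pvSet2 P i j (cellV (pvRow C (i - 1)) (pvGetI d i) D m c j).2) := by
  have hi0 : (0 : Int) ≤ i := by omega
  have hv0 : pvGet2 C (i - 1) 0 + max 0 (c * (pvGetI d i + j - m)) + hA j
      = cellG (pvRow C (i - 1)) (pvGetI d i) m c j 0 := by
    unfold cellG hA pvGet2 pvGetI
    norm_num
  have hiC' : i.toNat < (pvSet2 C i j (pvGet2 C (i - 1) 0 + max 0 (c * (pvGetI d i + j - m)) + hA j)).length := by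
    rw [pvSet2_length]; exact hiC
  have hiP' : i.toNat < (pvSet2 P i j 0).length := by rw [pvSet2_length]; exact hiP
  have hjC' : j.toNat < (pvRow (pvSet2 C i j (pvGet2 C (i - 1) 0 + max 0 (c * (pvGetI d i + j - m)) + hA j)) i).length := by
    rw [pvRow_pvSet2_self _ i j _ hi0 hiC, pvSet_length]; exact hjC
  have hjP' : j.toNat < (pvRow (pvSet2 P i j 0) i).length := by
    rw [pvRow_pvSet2_self _ i j _ hi0 hiP, pvSet_length]; exact hjP
  show (PySem.List.pyRange 1 (min (D + 1) (pvGetI d i + j + 1)) 1).foldl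
      (fun (st : List (List Int) × List (List Int)) k =>
        let cand := (fun (a k : Int) => a + max 0 (c * (pvGetI d i + j - m - k)) + hA j) (pvGet2 st.1 (i - 1) k) k
        if pvGet2 st.1 i j > cand then (pvSet2 st.1 i j cand, pvSet2 st.2 i j k) else st)
      (pvSet2 C i j (pvGet2 C (i - 1) 0 + max 0 (c * (pvGetI d i + j - m)) + hA j), pvSet2 P i j 0)
    = _
  rw [A_inner (fun (a k : Int) => a + max 0 (c * (pvGetI d i + j - m - k)) + hA j) i j hi hj0
      (PySem.List.pyRange 1 (min (D + 1) (pvGetI d i + j + 1)) 1) _ _ hiC' hiP' hjC' hjP']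
  rw [pvGet2_pvSet2_self C i j _ hi0 hj0 hiC hjC,
      pvGet2_pvSet2_self P i j 0 hi0 hj0 hiP hjP]
  rw [pvSet2_pvSet2 C i j _ _ hi0 hiC, pvSet2_pvSet2 P i j _ _ hi0 hiP]
  have hfold : (PySem.List.pyRange 1 (min (D + 1) (pvGetI d i + j + 1)) 1).foldl
      (fun (p : Int × Int) k =>
        let cand := (fun (a k : Int) => a + max 0 (c * (pvGetI d i + j - m - k)) + hA j)
          (pvGet2 (pvSet2 C i j (pvGet2 C (i - 1) 0 + max 0 (c * (pvGetI d i + j - m)) + hA j)) (i - 1) k) k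
        if p.1 > cand then (cand, k) else p)
      (pvGet2 C (i - 1) 0 + max 0 (c * (pvGetI d i + j - m)) + hA j, 0)
      = cellV (pvRow C (i - 1)) (pvGetI d i) D m c j := by
    unfold cellV bestF
    rw [hv0]
    apply PySem.List.foldl_congr_mem
    intro p k' _
    rw [pvGet2_pvSet2_pred C i j _ hi k']
    rfl
  rw [hfold]

theorem A_jfold (d : List Int) (D m c i : Int) (hi : 1 ≤ i) (prev : List Int) (js : List Int)
    (hjs : ∀ j ∈ js, 0 ≤ j) :
    ∀ C P : List (List Int), i.toNat < C.length → i.toNat < P.length →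
      pvRow C (i - 1) = prev →
      (∀ j ∈ js, j.toNat < (pvRow C i).length ∧ j.toNat < (pvRow P i).length) →
      js.foldl (fun (st : List (List Int) × List (List Int)) j =>
          let costs := pvSet2 st.1 i j (pvGet2 st.1 (i - 1) 0 + max 0 (c * (pvGetI d i + j - m)) + hA j)
          let plan := pvSet2 st.2 i j 0
          let e := min (D + 1) (pvGetI d i + j + 1)
          (PySem.List.pyRange 1 e 1).foldl
            (fun (st : List (List Int) × List (List Int)) k =>
              let cand := pvGet2 st.1 (i - 1) k + max 0 (c * (pvGetI d i + j - m - k)) + hA j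
              if pvGet2 st.1 i j > cand then (pvSet2 st.1 i j cand, pvSet2 st.2 i j k) else st)
            (costs, plan)) (C, P)
      = (pvSet C i (js.foldl (fun r j => pvSet r j ((cellV prev (pvGetI d i) D m c j).1)) (pvRow C i)),
         pvSet P i (js.foldl (fun r j => pvSet r j ((cellV prev (pvGetI d i) D m c j).2)) (pvRow P i))) := by
  have hi0 : (0 : Int) ≤ i := by omega
  induction js with
  | nil =>
    intro C P hiC hiP _ _
    simp only [List.foldl_nil]
    unfold pvRow
    rw [pvSet_get_self C i [] hi0 hiC, pvSet_get_self P i [] hi0 hiP]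
  | cons j js ih =>
    intro C P hiC hiP hprev hrows
    obtain ⟨hjC, hjP⟩ := hrows j (by simp)
    have hj0 : 0 ≤ j := hjs j (by simp)
    simp only [List.foldl_cons]
    rw [jbody_eq d D m c i j hi hj0 C P hiC hiP hjC hjP, hprev]
    have hiC' : i.toNat < (pvSet2 C i j (cellV prev (pvGetI d i) D m c j).1).length := by
      rw [pvSet2_length]; exact hiC
    have hiP' : i.toNat < (pvSet2 P i j (cellV prev (pvGetI d i) D m c j).2).length := by
      rw [pvSet2_length]; exact hiP
    have hprev' : pvRow (pvSet2 C i j (cellV prev (pvGetI d i) D m c j).1) (i - 1) = prev := by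
      rw [pvRow_pvSet2_ne C i (i - 1) j _ (by omega) (by omega)]; exact hprev
    have hrows' : ∀ x ∈ js,
        x.toNat < (pvRow (pvSet2 C i j (cellV prev (pvGetI d i) D m c j).1) i).length ∧
        x.toNat < (pvRow (pvSet2 P i j (cellV prev (pvGetI d i) D m c j).2) i).length := by
      intro x hx
      rw [pvRow_pvSet2_self C i j _ hi0 hiC, pvRow_pvSet2_self P i j _ hi0 hiP,
          pvSet_length, pvSet_length]
      exact hrows x (by simp [hx])
    rw [ih (fun x hx => hjs x (by simp [hx])) _ _ hiC' hiP' hprev' hrows']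
    rw [pvRow_pvSet2_self C i j _ hi0 hiC, pvRow_pvSet2_self P i j _ hi0 hiP]
    rw [show pvSet2 C i j (cellV prev (pvGetI d i) D m c j).1
        = pvSet C i (pvSet (pvRow C i) j (cellV prev (pvGetI d i) D m c j).1) from rfl]
    rw [show pvSet2 P i j (cellV prev (pvGetI d i) D m c j).2
        = pvSet P i (pvSet (pvRow P i) j (cellV prev (pvGetI d i) D m c j).2) from rfl]
    unfold pvSet
    rw [List.set_set, List.set_set]

theorem buildC_lens (d : List Int) (D m c : Int) :
    ∀ t : Nat, (buildC d D m c t).1.length = t + 1 ∧ (buildC d D m c t).2.1.length = t + 1 := by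
  intro t
  induction t with
  | zero => simp [buildC]
  | succ t ih => simp [buildC, ih.1, ih.2]

theorem buildC_last (d : List Int) (D m c : Int) :
    ∀ t : Nat, (buildC d D m c t).1[t]? = some ((buildC d D m c t).2.2) := by
  intro t
  induction t with
  | zero => simp [buildC]
  | succ t ih =>
    have hlen := (buildC_lens d D m c t).1
    simp only [buildC]
    rw [List.getElem?_append_right (by omega), hlen]
    simp

theorem A_outer (d : List Int) (D n m c : Int) (hD : 0 ≤ D) (hn : 1 ≤ n) :
    ∀ s : Nat, (s : Int) ≤ n - 1 →
    (PySem.List.pyRange 1 (1 + (s : Int)) 1).foldl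
        (fun (st : List (List Int) × List (List Int)) i =>
          (PySem.List.pyRange 0 (D + 1) 1).foldl
            (fun (st : List (List Int) × List (List Int)) j =>
              let costs := pvSet2 st.1 i j (pvGet2 st.1 (i - 1) 0 + max 0 (c * (pvGetI d i + j - m)) + hA j)
              let plan := pvSet2 st.2 i j 0
              let e := min (D + 1) (pvGetI d i + j + 1)
              (PySem.List.pyRange 1 e 1).foldl
                (fun (st : List (List Int) × List (List Int)) k =>
                  let cand := pvGet2 st.1 (i - 1) k + max 0 (c * (pvGetI d i + j - m - k)) + hA j
                  if pvGet2 st.1 i j > cand then (pvSet2 st.1 i j cand, pvSet2 st.2 i j k) else st)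
                (costs, plan))
            st)
        (row0V d D m c :: List.replicate (n.toNat - 1) (initRow D),
         initRow D :: List.replicate (n.toNat - 1) (initRow D))
    = ((buildC d D m c s).1 ++ List.replicate (n.toNat - 1 - s) (initRow D),
       (buildC d D m c s).2.1 ++ List.replicate (n.toNat - 1 - s) (initRow D)) := by
  intro s
  induction s with
  | zero =>
    intro _
    rw [show (PySem.List.pyRange 1 (1 + ((0 : Nat) : Int)) 1) = []
        from PySem.List.pyRange_one_eq_nil (by norm_num)]
    simp [buildC]
  | succ s ih =>
    intro hs
    rw [show PySem.List.pyRange 1 (1 + ((s + 1 : Nat) : Int)) 1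
        = PySem.List.pyRange 1 (1 + (s : Int)) 1 ++ [1 + (s : Int)] by
      rw [show (1 + ((s + 1 : Nat) : Int)) = (1 + (s : Int)) + 1 by push_cast; ring]
      exact PySem.List.pyRange_one_succ_right (by omega)]
    rw [List.foldl_append, ih (by omega)]
    simp only [List.foldl_cons, List.foldl_nil]
    set i : Int := 1 + (s : Int) with hidef
    set C : List (List Int) := (buildC d D m c s).1 ++ List.replicate (n.toNat - 1 - s) (initRow D) with hCdef
    set P : List (List Int) := (buildC d D m c s).2.1 ++ List.replicate (n.toNat - 1 - s) (initRow D) with hPdef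
    have hlens := buildC_lens d D m c s
    have hsn : s + 1 ≤ n.toNat - 1 := by omega
    have hiN : i.toNat = s + 1 := by omega
    have hClen : C.length = n.toNat := by
      rw [hCdef, List.length_append, hlens.1, List.length_replicate]; omega
    have hPlen : P.length = n.toNat := by
      rw [hPdef, List.length_append, hlens.2, List.length_replicate]; omega
    have hiC : i.toNat < C.length := by omega
    have hiP : i.toNat < P.length := by omega
    have hprev : pvRow C (i - 1) = (buildC d D m c s).2.2 := by
      unfold pvRow
      rw [pvGetD_nonneg _ _ _ (by omega)]
      rw [show (i - 1).toNat = s by omega]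
      rw [hCdef, List.getElem?_append_left (by rw [hlens.1]; omega)]
      rw [buildC_last d D m c s]
      rfl
    have hrowC : pvRow C i = initRow D := by
      unfold pvRow
      rw [pvGetD_nonneg _ _ _ (by omega), hiN]
      rw [hCdef, List.getElem?_append_right hlens.1.le, hlens.1]
      have h0 : (0:Nat) < n.toNat - 1 - s := by omega
      simp [h0]
    have hrowP : pvRow P i = initRow D := by
      unfold pvRow
      rw [pvGetD_nonneg _ _ _ (by omega), hiN]
      rw [hPdef, List.getElem?_append_right hlens.2.le, hlens.2]
      have h0 : (0:Nat) < n.toNat - 1 - s := by omega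
      simp [h0]
    rw [A_jfold d D m c i (by omega) ((buildC d D m c s).2.2) (PySem.List.pyRange 0 (D + 1) 1)
        (fun j hj => ((PySem.List.mem_pyRange_one).mp hj).1) C P hiC hiP hprev
        (by
          intro j hj
          rw [PySem.List.mem_pyRange_one] at hj
          rw [hrowC, hrowP]
          unfold initRow
          constructor <;> (rw [List.length_replicate]; omega))]
    rw [hrowC, hrowP]
    rw [foldl_set_full _ (D + 1) (initRow D) (by unfold initRow; rw [List.length_replicate]),
        foldl_set_full _ (D + 1) (initRow D) (by unfold initRow; rw [List.length_replicate])]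
    have hset : ∀ (a : List (List Int)) (r row : List Int), a.length = s + 1 →
        pvSet (a ++ List.replicate (n.toNat - 1 - s) r) i row
          = (a ++ [row]) ++ List.replicate (n.toNat - 1 - (s + 1)) r := by
      intro a r row ha
      unfold pvSet
      rw [List.set_append, if_neg (by rw [ha]; omega)]
      rw [show List.replicate (n.toNat - 1 - s) r = r :: List.replicate (n.toNat - 1 - (s + 1)) r by
        rw [← List.replicate_succ]; congr 1; omega]
      rw [show (i.toNat - a.length) = 0 by omega]
      simp [List.append_assoc]
    rw [hCdef, hPdef, hset _ _ _ (hlens.1), hset _ _ _ (hlens.2)]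
    rw [show buildC d D m c (s + 1)
        = ((buildC d D m c s).1 ++ [(PySem.List.pyRange 0 (D + 1) 1).map
              (fun j => (cellV (buildC d D m c s).2.2 (pvGetI d ((s : Int) + 1)) D m c j).1)],
           (buildC d D m c s).2.1 ++ [(PySem.List.pyRange 0 (D + 1) 1).map
              (fun j => (cellV (buildC d D m c s).2.2 (pvGetI d ((s : Int) + 1)) D m c j).2)],
           (PySem.List.pyRange 0 (D + 1) 1).map
              (fun j => (cellV (buildC d D m c s).2.2 (pvGetI d ((s : Int) + 1)) D m c j).1)) from rfl]
    rw [show ((s : Int) + 1) = 1 + (s : Int) by ring]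

theorem plan_inventory_eq_build (d : List Int) (D n m c : Int) (hn : 1 ≤ n) (hD : 0 ≤ D) :
    plan_inventory d D n m c = ((buildC d D m c (n - 1).toNat).1, (buildC d D m c (n - 1).toNat).2.1) := by
  simp only [plan_inventory]
  rw [foldl_append_rows (PySem.List.pyRange 0 n 1) (List.replicate (D + 1).toNat (-1)) [] []]
  simp only [List.nil_append, PySem.List.length_pyRange_one]
  rw [show List.replicate (n - 0).toNat (List.replicate (D + 1).toNat (-1))
      = initRow D :: List.replicate (n.toNat - 1) (initRow D) by
    rw [show (n - 0).toNat = (n.toNat - 1) + 1 by omega, List.replicate_succ]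
    rfl]
  have hrow0 : (PySem.List.pyRange 1 (D + 1) 1).foldl
      (fun costs j => pvSet2 costs 0 j (max 0 (c * (pvGetI d 0 + j - m)) + hA j))
      (pvSet2 (initRow D :: List.replicate (n.toNat - 1) (initRow D)) 0 0
        (max 0 (c * (pvGetI d 0 - m))))
      = row0V d D m c :: List.replicate (n.toNat - 1) (initRow D) := by
    set C0 : List (List Int) := initRow D :: List.replicate (n.toNat - 1) (initRow D) with hC0
    have hl : (0 : Int).toNat < C0.length := by simp [hC0]
    have hrowC0 : pvRow C0 0 = initRow D := by
      rw [hC0]; exact PySem.List.pyGetD_zero_cons _ _ _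
    rw [fold_pvSet2_row (fun j => max 0 (c * (pvGetI d 0 + j - m)) + hA j) 0 (le_refl 0)
        (PySem.List.pyRange 1 (D + 1) 1) _ (by rw [pvSet2_length]; exact hl)]
    rw [pvRow_pvSet2_self C0 0 0 _ (le_refl 0) hl, hrowC0]
    rw [show pvSet2 C0 0 0 (max 0 (c * (pvGetI d 0 - m)))
        = pvSet C0 0 (pvSet (initRow D) 0 (max 0 (c * (pvGetI d 0 - m)))) from by
      unfold pvSet2; rw [hrowC0]]
    rw [show ∀ X Y, pvSet (pvSet C0 0 X) 0 Y = pvSet C0 0 Y from fun X Y => by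
      unfold pvSet; rw [List.set_set]]
    rw [show pvSet (initRow D) 0 (max 0 (c * (pvGetI d 0 - m)))
        = pvSet (initRow D) 0 ((fun j => max 0 (c * (pvGetI d 0 + j - m)) + hA j) 0) from by
      norm_num [hA]]
    rw [show (PySem.List.pyRange 1 (D + 1) 1).foldl
          (fun r j => pvSet r j ((fun j => max 0 (c * (pvGetI d 0 + j - m)) + hA j) j))
          (pvSet (initRow D) 0 ((fun j => max 0 (c * (pvGetI d 0 + j - m)) + hA j) 0))
        = ((0 : Int) :: PySem.List.pyRange 1 (D + 1) 1).foldl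
          (fun r j => pvSet r j ((fun j => max 0 (c * (pvGetI d 0 + j - m)) + hA j) j))
          (initRow D) from rfl]
    rw [show (0 : Int) :: PySem.List.pyRange 1 (D + 1) 1 = PySem.List.pyRange 0 (D + 1) 1 from by
      rw [PySem.List.pyRange_one_cons (by omega : (0 : Int) < D + 1)]
      norm_num]
    rw [foldl_set_full _ (D + 1) (initRow D) (by unfold initRow; rw [List.length_replicate])]
    rfl
  rw [hrow0]
  rw [show PySem.List.pyRange 1 n 1 = PySem.List.pyRange 1 (1 + (((n - 1).toNat : Nat) : Int)) 1
      by rw [show (1 + (((n - 1).toNat : Nat) : Int)) = n by omega]]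
  rw [A_outer d D n m c hD hn (n - 1).toNat (by omega)]
  rw [show n.toNat - 1 - (n - 1).toNat = 0 by omega]
  simp

-- ---- B-side: least-argmin specification ----

-- p is (min value, least argmin) of g on the integer interval [a, b]
def LArg (g : Int → Int) (a b : Int) (p : Int × Int) : Prop :=
  a ≤ p.2 ∧ p.2 ≤ b ∧ g p.2 = p.1 ∧ (∀ t, a ≤ t → t ≤ b → p.1 ≤ g t) ∧
    (∀ t, a ≤ t → t < p.2 → p.1 < g t)

theorem LArg_unique (g : Int → Int) (a b : Int) (p q : Int × Int)
    (hp : LArg g a b p) (hq : LArg g a b q) : p = q := by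
  obtain ⟨hp1, hp2, hp3, hp4, hp5⟩ := hp
  obtain ⟨hq1, hq2, hq3, hq4, hq5⟩ := hq
  have hv : p.1 = q.1 := by
    have h1 := hp4 q.2 hq1 hq2
    have h2 := hq4 p.2 hp1 hp2
    omega
  have hk : p.2 = q.2 := by
    by_contra hne
    rcases lt_or_gt_of_ne hne with h | h
    · have := hq5 p.2 hp1 h; omega
    · have := hp5 q.2 hq1 h; omega
  exact Prod.ext hv hk

theorem LArg_single (g : Int → Int) (a : Int) : LArg g a a (g a, a) := by
  refine ⟨le_refl a, le_refl a, rfl, ?_, ?_⟩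
  · intro t h1 h2; have : t = a := le_antisymm h2 h1; rw [this]
  · intro t h1 h2; omega

-- extend on the right with strict-< rule (keeps the earliest minimiser)
theorem LArg_snoc_right (g : Int → Int) (a b : Int) (p : Int × Int)
    (hp : LArg g a b p) (hab : a ≤ b) :
    LArg g a (b + 1) (if g (b + 1) < p.1 then (g (b + 1), b + 1) else p) := by
  obtain ⟨hp1, hp2, hp3, hp4, hp5⟩ := hp
  by_cases hc : g (b + 1) < p.1
  · rw [if_pos hc]
    refine ⟨by omega, le_refl _, rfl, ?_, ?_⟩
    · intro t h1 h2
      rcases lt_or_ge t (b + 1) with h | h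
      · have := hp4 t h1 (by omega); omega
      · have : t = b + 1 := by omega
        rw [this]
    · intro t h1 h2
      have := hp4 t h1 (by omega); omega
  · rw [if_neg hc]
    refine ⟨hp1, by omega, hp3, ?_, hp5⟩
    intro t h1 h2
    rcases lt_or_ge t (b + 1) with h | h
    · exact hp4 t h1 (by omega)
    · have : t = b + 1 := by omega
      rw [this]; omega

-- extend on the left with non-strict-≤ rule (keeps the earliest minimiser)
theorem LArg_cons_left (g : Int → Int) (a b : Int) (q : Int × Int)
    (hq : LArg g a b q) (hab : a ≤ b) :
    LArg g (a - 1) b (if g (a - 1) ≤ q.1 then (g (a - 1), a - 1) else q) := by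
  obtain ⟨hq1, hq2, hq3, hq4, hq5⟩ := hq
  by_cases hc : g (a - 1) ≤ q.1
  · rw [if_pos hc]
    refine ⟨le_refl _, by omega, rfl, ?_, ?_⟩
    · intro t h1 h2
      rcases lt_or_ge t a with h | h
      · have : t = a - 1 := by omega
        rw [this]
      · have := hq4 t h h2; omega
    · intro t h1 h2; omega
  · rw [if_neg hc]
    refine ⟨by omega, hq2, hq3, ?_, ?_⟩
    · intro t h1 h2
      rcases lt_or_ge t a with h | h
      · have : t = a - 1 := by omega
        rw [this]; omega
      · exact hq4 t h h2
    · intro t h1 h2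
      rcases lt_or_ge t a with h | h
      · have : t = a - 1 := by omega
        rw [this]; omega
      · exact hq5 t h h2

-- combine adjacent segments, picking the right one only on strict improvement
theorem LArg_combine (g : Int → Int) (a t b : Int) (p q : Int × Int)
    (hat : a ≤ t) (htb : t < b)
    (hp : LArg g a t p) (hq : LArg g (t + 1) b q) :
    LArg g a b (if q.1 < p.1 then q else p) := by
  obtain ⟨hp1, hp2, hp3, hp4, hp5⟩ := hp
  obtain ⟨hq1, hq2, hq3, hq4, hq5⟩ := hq
  by_cases hc : q.1 < p.1
  · rw [if_pos hc]
    refine ⟨by omega, hq2, hq3, ?_, ?_⟩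
    · intro s h1 h2
      by_cases h : s ≤ t
      · have := hp4 s h1 h; omega
      · exact hq4 s (by omega) h2
    · intro s h1 h2
      by_cases h : s ≤ t
      · have := hp4 s h1 h; omega
      · exact hq5 s (by omega) h2
  · rw [if_neg hc]
    refine ⟨hp1, by omega, hp3, ?_, ?_⟩
    · intro s h1 h2
      by_cases h : s ≤ t
      · exact hp4 s h1 h
      · have := hq4 s (by omega) h2; omega
    · intro s h1 h2
      exact hp5 s h1 h2

-- shift a least-argmin by a constant offset, along a pointwise description of g
theorem LArg_offset (g key : Int → Int) (a b off : Int) (p : Int × Int)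
    (hp : LArg key a b p) (h : ∀ t, a ≤ t → t ≤ b → g t = key t + off) :
    LArg g a b (p.1 + off, p.2) := by
  obtain ⟨hp1, hp2, hp3, hp4, hp5⟩ := hp
  refine ⟨hp1, hp2, by rw [h p.2 hp1 hp2, hp3], ?_, ?_⟩
  · intro t h1 h2; rw [h t h1 h2]; have := hp4 t h1 h2; omega
  · intro t h1 h2; rw [h t h1 (by omega)]; have := hp5 t h1 h2; omega

-- A's inner scan computes the least argmin of cellG on [0, E]
theorem cellV_LArg (prev : List Int) (di D m c j : Int) :
    LArg (cellG prev di m c j) 0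
      (if min D (di + j) < 0 then 0 else min D (di + j))
      (cellV prev di D m c j) := by
  have run : ∀ s : Nat, LArg (cellG prev di m c j) 0 (s : Int)
      (bestF (cellG prev di m c j) (PySem.List.pyRange 1 ((s : Int) + 1) 1)
        (cellG prev di m c j 0, 0)) := by
    intro s
    induction s with
    | zero =>
      rw [show (((0 : Nat) : Int) + 1) = 1 by norm_num,
          show PySem.List.pyRange 1 1 1 = [] from PySem.List.pyRange_one_eq_nil (le_refl 1)]
      exact LArg_single _ 0
    | succ s ih =>
      rw [show (((s + 1 : Nat) : Int) + 1) = ((s : Int) + 1) + 1 by push_cast; ring,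
          PySem.List.pyRange_one_succ_right (by omega), bestF_append]
      rw [show ((s + 1 : Nat) : Int) = (s : Int) + 1 by push_cast; ring]
      exact LArg_snoc_right (cellG prev di m c j) 0 (s : Int) _ ih (by positivity)
  unfold cellV
  by_cases hE : min D (di + j) < 0
  · rw [if_pos hE]
    rw [show PySem.List.pyRange 1 (min (D + 1) (di + j + 1)) 1 = []
        from PySem.List.pyRange_one_eq_nil (by omega)]
    exact LArg_single _ 0
  · rw [if_neg hE]
    have h := run (min D (di + j)).toNat
    rw [show ((min D (di + j)).toNat : Int) = min D (di + j) by omega] at h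
    rw [show min (D + 1) (di + j + 1) = min D (di + j) + 1 by omega]
    exact h

-- fwdScan's fold appends, step by step, the least argmin of g on [start k, k]
theorem fwd_go (key : List Int) (reset : Int → Bool) (g : Int → Int) (start : Int → Int)
    (L : Int)
    (hg : ∀ k, 0 ≤ k → k < L → pvGetI key k = g k)
    (h0 : reset 0 = true)
    (h1 : ∀ k, 0 ≤ k → k < L → reset k = true → start k = k)
    (h2 : ∀ k, 0 < k → k < L → reset k = false → start k = start (k - 1))
    (hsk : ∀ k, 0 ≤ k → k < L → start k ≤ k) :
    ∀ (cnt : Nat) (a : Int), 0 ≤ a → a + cnt = L →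
      ∀ (acc : List (Int × Int)) (best : Int × Int),
        (0 < a → LArg g (start (a - 1)) (a - 1) best) →
        ∃ tail : List (Int × Int),
          ((PySem.List.pyRange a L 1).foldl
            (fun (st : List (Int × Int) × (Int × Int)) k =>
              let v := pvGetI key k
              let best := if reset k || decide (v < st.2.1) then (v, k) else st.2
              (st.1 ++ [best], best)) (acc, best)).1 = acc ++ tail ∧
          tail.length = cnt ∧
          ∀ idx : Nat, idx < cnt →
            ∃ p, tail[idx]? = some p ∧ LArg g (start (a + idx)) (a + idx) p := by
  intro cnt
  induction cnt with
  | zero =>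
    intro a ha0 haL acc best _
    rw [show PySem.List.pyRange a L 1 = [] from PySem.List.pyRange_one_eq_nil (by omega)]
    exact ⟨[], by simp, rfl, fun idx h => absurd h (by omega)⟩
  | succ cnt ih =>
    intro a ha0 haL acc best hbest
    have haL' : a < L := by omega
    rw [PySem.List.pyRange_one_cons haL']
    simp only [List.foldl_cons]
    set best' : Int × Int :=
      if reset a || decide (pvGetI key a < best.1) then (pvGetI key a, a) else best with hbd
    have hbest' : LArg g (start a) a best' := by
      by_cases hr : reset a = true
      · have : best' = (g a, a) := by rw [hbd, hr, Bool.true_or, if_pos rfl, hg a ha0 haL']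
        rw [this, h1 a ha0 haL' hr]
        exact LArg_single g a
      · have hrf : reset a = false := by simpa using hr
        have hapos : 0 < a := by
          rcases eq_or_lt_of_le ha0 with h | h
          · exfalso; rw [← h] at hrf; rw [h0] at hrf; simp at hrf
          · exact h
        have hb := hbest hapos
        have hs : start a = start (a - 1) := h2 a hapos haL' hrf
        have := LArg_snoc_right g (start (a - 1)) (a - 1) best hb
          (hsk (a - 1) (by omega) (by omega))
        rw [show a - 1 + 1 = a by ring] at this
        rw [hbd, hrf, Bool.false_or, hs]
        by_cases hlt : pvGetI key a < best.1
        · rw [if_pos (by simpa using hlt), hg a ha0 haL']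
          rw [if_pos (by rw [← hg a ha0 haL']; exact hlt)] at this
          exact this
        · rw [if_neg (by simpa using hlt)]
          rw [if_neg (by rw [← hg a ha0 haL']; exact hlt)] at this
          exact this
    obtain ⟨tail', he, hlen, hidx⟩ := ih (a + 1) (by omega) (by omega) (acc ++ [best']) best'
      (fun _ => by rw [show a + 1 - 1 = a by ring]; exact hbest')
    refine ⟨best' :: tail', by rw [he]; simp, by simp [hlen], ?_⟩
    intro idx hicnt
    cases idx with
    | zero =>
      refine ⟨best', rfl, ?_⟩
      rw [show a + ((0 : Nat) : Int) = a by norm_num]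
      exact hbest'
    | succ idx =>
      obtain ⟨p, hp1, hp2⟩ := hidx idx (by omega)
      refine ⟨p, by simpa using hp1, ?_⟩
      rw [show a + ((idx + 1 : Nat) : Int) = a + 1 + (idx : Int) by push_cast; ring]
      exact hp2

-- fwdScan: element k is the least argmin of g on [start k, k]
theorem fwdScan_spec (key : List Int) (reset : Int → Bool) (g : Int → Int) (start : Int → Int)
    (L : Int) (hL : (key.length : Int) = L)
    (hg : ∀ k, 0 ≤ k → k < L → pvGetI key k = g k)
    (h0 : reset 0 = true)
    (h1 : ∀ k, 0 ≤ k → k < L → reset k = true → start k = k)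
    (h2 : ∀ k, 0 < k → k < L → reset k = false → start k = start (k - 1))
    (hsk : ∀ k, 0 ≤ k → k < L → start k ≤ k) :
    ∀ k, 0 ≤ k → k < L → LArg g (start k) k (pvGetP (fwdScan key reset) k) := by
  intro k hk0 hkL
  obtain ⟨tail, he, hlen, hidx⟩ := fwd_go key reset g start L hg h0 h1 h2 hsk L.toNat 0
    (le_refl 0) (by omega) [] (0, 0) (fun h => absurd h (by omega))
  obtain ⟨p, hp1, hp2⟩ := hidx k.toNat (by omega)
  have hfe : fwdScan key reset = tail := by
    unfold fwdScan
    rw [hL, he]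
    simp
  rw [hfe]
  unfold pvGetP
  rw [pvGetD_nonneg _ _ _ hk0, hp1, Option.getD_some]
  rw [show (0 : Int) + (k.toNat : Int) = k by omega] at hp2
  exact hp2

-- bwdScan's fold appends, going down, the least argmin of g on [k, endp k]
theorem bwd_go (key : List Int) (reset : Int → Bool) (g : Int → Int) (endp : Int → Int)
    (L : Int)
    (hg : ∀ k, 0 ≤ k → k < L → pvGetI key k = g k)
    (h0 : reset (L - 1) = true)
    (h1 : ∀ k, 0 ≤ k → k < L → reset k = true → endp k = k)
    (h2 : ∀ k, 0 ≤ k → k < L - 1 → reset k = false → endp k = endp (k + 1))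
    (hke : ∀ k, 0 ≤ k → k < L → k ≤ endp k) :
    ∀ (cnt : Nat) (a : Int), a + 1 = cnt → a ≤ L - 1 →
      ∀ (acc : List (Int × Int)) (best : Int × Int),
        (a < L - 1 → LArg g (a + 1) (endp (a + 1)) best) →
        ∃ tail : List (Int × Int),
          ((PySem.List.pyRange a (-1) (-1)).foldl
            (fun (st : List (Int × Int) × (Int × Int)) k =>
              let v := pvGetI key k
              let best := if reset k || decide (v ≤ st.2.1) then (v, k) else st.2
              (st.1 ++ [best], best)) (acc, best)).1 = acc ++ tail ∧
          tail.length = cnt ∧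
          ∀ idx : Nat, idx < cnt →
            ∃ p, tail[idx]? = some p ∧ LArg g (a - idx) (endp (a - idx)) p := by
  intro cnt
  induction cnt with
  | zero =>
    intro a ha1 haL acc best _
    rw [show PySem.List.pyRange a (-1) (-1) = []
        from PySem.List.pyRange_neg_one_eq_nil (by omega)]
    exact ⟨[], by simp, rfl, fun idx h => absurd h (by omega)⟩
  | succ cnt ih =>
    intro a ha1 haL acc best hbest
    have ha0 : 0 ≤ a := by omega
    have haL' : a < L := by omega
    rw [PySem.List.pyRange_neg_one_cons (by omega : (-1 : Int) < a)]
    simp only [List.foldl_cons]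
    set best' : Int × Int :=
      if reset a || decide (pvGetI key a ≤ best.1) then (pvGetI key a, a) else best with hbd
    have hbest' : LArg g a (endp a) best' := by
      by_cases hr : reset a = true
      · have : best' = (g a, a) := by rw [hbd, hr, Bool.true_or, if_pos rfl, hg a ha0 haL']
        rw [this, h1 a ha0 haL' hr]
        exact LArg_single g a
      · have hrf : reset a = false := by simpa using hr
        have hatop : a < L - 1 := by
          rcases eq_or_lt_of_le haL with h | h
          · exfalso; rw [h] at hrf; rw [h0] at hrf; simp at hrf
          · omega
        have hb := hbest hatop
        have hs : endp a = endp (a + 1) := h2 a ha0 hatop hrf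
        have := LArg_cons_left g (a + 1) (endp (a + 1)) best hb
          (hke (a + 1) (by omega) (by omega))
        rw [show a + 1 - 1 = a by ring] at this
        rw [hbd, hrf, Bool.false_or, hs]
        by_cases hle : pvGetI key a ≤ best.1
        · rw [if_pos (by simpa using hle), hg a ha0 haL']
          rw [if_pos (by rw [← hg a ha0 haL']; exact hle)] at this
          exact this
        · rw [if_neg (by simpa using hle)]
          rw [if_neg (by rw [← hg a ha0 haL']; exact hle)] at this
          exact this
    obtain ⟨tail', he, hlen, hidx⟩ := ih (a - 1) (by omega) (by omega) (acc ++ [best']) best'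
      (fun _ => by rw [show a - 1 + 1 = a by ring]; exact hbest')
    refine ⟨best' :: tail', by rw [he]; simp, by simp [hlen], ?_⟩
    intro idx hicnt
    cases idx with
    | zero =>
      refine ⟨best', rfl, ?_⟩
      rw [show a - ((0 : Nat) : Int) = a by norm_num]
      exact hbest'
    | succ idx =>
      obtain ⟨p, hp1, hp2⟩ := hidx idx (by omega)
      refine ⟨p, by simpa using hp1, ?_⟩
      rw [show a - ((idx + 1 : Nat) : Int) = a - 1 - (idx : Int) by push_cast; ring]
      exact hp2

-- bwdScan: element k is the least argmin of g on [k, endp k]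
theorem bwdScan_spec (key : List Int) (reset : Int → Bool) (g : Int → Int) (endp : Int → Int)
    (L : Int) (hL : (key.length : Int) = L) (hLpos : 0 < L)
    (hg : ∀ k, 0 ≤ k → k < L → pvGetI key k = g k)
    (h0 : reset (L - 1) = true)
    (h1 : ∀ k, 0 ≤ k → k < L → reset k = true → endp k = k)
    (h2 : ∀ k, 0 ≤ k → k < L - 1 → reset k = false → endp k = endp (k + 1))
    (hke : ∀ k, 0 ≤ k → k < L → k ≤ endp k) :
    ∀ k, 0 ≤ k → k < L → LArg g k (endp k) (pvGetP (bwdScan key reset) k) := by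
  intro k hk0 hkL
  obtain ⟨tail, he, hlen, hidx⟩ := bwd_go key reset g endp L hg h0 h1 h2 hke L.toNat (L - 1)
    (by omega) (le_refl _) [] (0, 0) (fun h => absurd h (by omega))
  obtain ⟨p, hp1, hp2⟩ := hidx (L.toNat - 1 - k.toNat) (by omega)
  have hfe : bwdScan key reset = tail.reverse := by
    unfold bwdScan
    rw [hL, he]
    simp
  rw [hfe]
  unfold pvGetP
  rw [pvGetD_nonneg _ _ _ hk0,
      List.getElem?_reverse (by rw [hlen]; omega), hlen]
  rw [show L.toNat - 1 - k.toNat = L.toNat - 1 - k.toNat from rfl] at hp1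
  rw [hp1, Option.getD_some]
  rw [show L - 1 - ((L.toNat - 1 - k.toNat : Nat) : Int) = k by omega] at hp2
  exact hp2

-- Int division helpers for the block decomposition
theorem ediv_shift (kk Bq : Int) (hBq : 0 < Bq) (r : Int) (hr0 : 0 ≤ r) (hrB : r < Bq) :
    (r + Bq * (kk / Bq)) / Bq = kk / Bq := by
  rw [Int.add_mul_ediv_left r (kk / Bq) (by omega : Bq ≠ 0),
      Int.ediv_eq_zero_of_lt hr0 hrB, zero_add]

-- the O(1) two-segment query (prefix of keyL, window of keyH) is the least argmin on [0,E]
theorem query_LArg (g keyL keyH : Int → Int) (D Bq E t offL offH : Int)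
    (P F S BP BS : List (Int × Int))
    (hBq : 1 ≤ Bq) (hE0 : 0 ≤ E) (hED : E ≤ D) (htE : t ≤ E)
    (hwidth : 0 ≤ t → t + 1 ≤ E → E < D → E = t + Bq)
    (hglow : 0 ≤ t → ∀ k, 0 ≤ k → k ≤ t → g k = keyL k + offL)
    (hghigh : 0 ≤ t → t + 1 ≤ E → ∀ k, t + 1 ≤ k → k ≤ E → g k = keyH k + offH)
    (hlow0 : t < 0 → ∀ k, 0 ≤ k → k ≤ E → g k = keyH k + offH)
    (hPq : ∀ u, 0 ≤ u → u ≤ D → LArg keyL 0 u (pvGetP P u))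
    (hFq : ∀ u, 0 ≤ u → u ≤ D → LArg keyH 0 u (pvGetP F u))
    (hSq : ∀ u, 0 ≤ u → u ≤ D → LArg keyH u D (pvGetP S u))
    (hBPq : ∀ u, 0 ≤ u → u ≤ D → LArg keyH (Bq * (u / Bq)) u (pvGetP BP u))
    (hBSq : ∀ u, 0 ≤ u → u ≤ D → LArg keyH u (min D (Bq * (u / Bq) + Bq - 1)) (pvGetP BS u)) :
    LArg g 0 E
      (if t < 0 then ((pvGetP F E).1 + offH, (pvGetP F E).2)
       else
         if t + 1 ≤ E then
           (if ((if E == D then pvGetP S (t + 1)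
                 else
                   if (pvGetP BP E).1 < (pvGetP BS (t + 1)).1 then pvGetP BP E
                   else pvGetP BS (t + 1)).1 + offH)
               < (pvGetP P t).1 + offL then
              ((if E == D then pvGetP S (t + 1)
                else
                  if (pvGetP BP E).1 < (pvGetP BS (t + 1)).1 then pvGetP BP E
                  else pvGetP BS (t + 1)).1 + offH,
               (if E == D then pvGetP S (t + 1)
                else
                  if (pvGetP BP E).1 < (pvGetP BS (t + 1)).1 then pvGetP BP E
                  else pvGetP BS (t + 1)).2)
            else ((pvGetP P t).1 + offL, (pvGetP P t).2))
         else ((pvGetP P t).1 + offL, (pvGetP P t).2)) := by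
  by_cases ht : t < 0
  · rw [if_pos ht]
    exact LArg_offset g keyH 0 E offH _ (hFq E hE0 hED) (hlow0 ht)
  · rw [if_neg ht]
    have ht0 : 0 ≤ t := by omega
    have hbp0 : LArg g 0 t ((pvGetP P t).1 + offL, (pvGetP P t).2) :=
      LArg_offset g keyL 0 t offL _ (hPq t ht0 (by omega)) (hglow ht0)
    by_cases ha : t + 1 ≤ E
    · rw [if_pos ha]
      have hhh : LArg keyH (t + 1)  E
          (if E == D then pvGetP S (t + 1)
           else
             if (pvGetP BP E).1 < (pvGetP BS (t + 1)).1 then pvGetP BP E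
             else pvGetP BS (t + 1)) := by
        by_cases hEDq : E = D
        · rw [if_pos (by simpa using hEDq)]
          have := hSq (t + 1) (by omega) (by omega)
          rw [← hEDq] at this
          exact this
        · rw [if_neg (by simpa using hEDq)]
          have hEltD : E < D := by omega
          have hEw : E = t + Bq := hwidth ht0 ha hEltD
          set a : Int := t + 1 with hadef
          have ha0 : 0 ≤ a := by omega
          have hka := Int.ediv_add_emod a Bq
          have hr0 : 0 ≤ a % Bq := Int.emod_nonneg a (by omega)
          have hrB : a % Bq < Bq := Int.emod_lt_of_pos a (by omega)
          by_cases hrz : a % Bq = 0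
          · -- the window is exactly one aligned block: both covers are [a, E]
            have hstart : Bq * (a / Bq) = a := by omega
            have hEdiv : E / Bq = a / Bq := by
              rw [show E = (Bq - 1) + Bq * (a / Bq) by omega]
              exact ediv_shift a Bq (by omega) (Bq - 1) (by omega) (by omega)
            have hbp2 : LArg keyH a E (pvGetP BP E) := by
              have := hBPq E (by omega) (by omega)
              rw [hEdiv, hstart] at this
              exact this
            have hbs : LArg keyH a E (pvGetP BS a) := by
              have := hBSq a ha0 (by omega)
              rw [show min D (Bq * (a / Bq) + Bq - 1) = E by omega] at this
              exact this
            have heq : pvGetP BP E = pvGetP BS a := LArg_unique keyH a E _ _ hbp2 hbs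
            rw [heq, ite_self]
            exact hbs
          · -- the window spans two adjacent blocks
            set mid : Int := Bq * (a / Bq) + Bq - 1 with hmid
            have hamid : a ≤ mid := by omega
            have hmidE : mid < E := by omega
            have hbs : LArg keyH a mid (pvGetP BS a) := by
              have := hBSq a ha0 (by omega)
              rw [show min D (Bq * (a / Bq) + Bq - 1) = mid by omega] at this
              exact this
            have hEdiv : E / Bq = a / Bq + 1 := by
              rw [show E = (a % Bq - 1) + Bq * (a / Bq + 1) by ring_nf; omega]
              rw [Int.add_mul_ediv_left _ (a / Bq + 1) (by omega : Bq ≠ 0),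
                  Int.ediv_eq_zero_of_lt (by omega) (by omega), zero_add]
            have hbp2 : LArg keyH (mid + 1) E (pvGetP BP E) := by
              have := hBPq E (by omega) (by omega)
              rw [hEdiv, show Bq * (a / Bq + 1) = mid + 1 by ring_nf; omega] at this
              exact this
            exact LArg_combine keyH a mid E _ _ hamid hmidE hbs hbp2
      have hhh' : LArg g (t + 1) E
          ((if E == D then pvGetP S (t + 1)
            else
              if (pvGetP BP E).1 < (pvGetP BS (t + 1)).1 then pvGetP BP E
              else pvGetP BS (t + 1)).1 + offH,
           (if E == D then pvGetP S (t + 1)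
            else
              if (pvGetP BP E).1 < (pvGetP BS (t + 1)).1 then pvGetP BP E
              else pvGetP BS (t + 1)).2) :=
        LArg_offset g keyH (t + 1) E offH _ hhh (hghigh ht0 ha)
      exact LArg_combine g 0 t E _ _ ht0 (by omega) hbp0 hhh'
    · rw [if_neg ha]
      have htEe : t = E := by omega
      rw [← htEe]
      exact hbp0

-- the per-cell O(1) combination equals A's per-cell scan
theorem cellAlt_eq (prev : List Int) (D m c di j : Int) (hD : 0 ≤ D)
    (hlen : prev.length = (D + 1).toNat) (hj0 : 0 ≤ j) (hjD : j ≤ D) :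
    (let lhw : List Int × List Int × Int :=
       if 0 ≤ c then ((PySem.List.pyRange 0 (D + 1) 1).map (fun k => pvGetI prev k - c * k), prev, m)
       else (prev, (PySem.List.pyRange 0 (D + 1) 1).map (fun k => pvGetI prev k - c * k), m + 1)
     let low := lhw.1
     let high := lhw.2.1
     let w := lhw.2.2
     let Bq := if 1 ≤ w then w else 1
     let P := fwdScan low (fun k => k == 0)
     let F := fwdScan high (fun k => k == 0)
     let S := bwdScan high (fun k => k == D)
     let BP := fwdScan high (fun k => PySem.Int.mod k Bq == 0)
     let BS := bwdScan high (fun k => k == D || PySem.Int.mod k Bq == Bq - 1)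
     let M := di + j
     let x := M - m
     let E0 := min D M
     let E := if E0 < 0 then 0 else E0
     let t := if 0 ≤ c then min x E else min (x - 1) E
     let offl := if 0 ≤ c then c * x else 0
     let offh := if 0 ≤ c then 0 else c * x
     let bp : Int × Int :=
       if t < 0 then
         let f := pvGetP F E
         (f.1 + offh, f.2)
       else
         let p := pvGetP P t
         let bp0 : Int × Int := (p.1 + offl, p.2)
         let a := t + 1
         if a ≤ E then
           let hh : Int × Int :=
             if E == D then pvGetP S a
             else
               let bs := pvGetP BS a
               let bp2 := pvGetP BP E
               if bp2.1 < bs.1 then bp2 else bs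
           let hh' : Int × Int := (hh.1 + offh, hh.2)
           if hh'.1 < bp0.1 then hh' else bp0
         else bp0
     (bp.1 + j, bp.2))
    = cellV prev di D m c j := by
  have hc0D : (0:Int) ≤ D + 1 := by omega
  by_cases hc : 0 ≤ c
  · simp only [if_pos hc]
    set Ev : Int := if min D (di + j) < 0 then 0 else min D (di + j) with hEv
    set Bqv : Int := if 1 ≤ m then m else 1 with hBqv
    set xv : Int := di + j - m with hxv
    set tv : Int := min xv Ev with htv
    have hBq1 : (1:Int) ≤ Bqv := by rw [hBqv]; split_ifs <;> omega
    have hBqpos : (0:Int) < Bqv := by omega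
    have hlenMap : ((((PySem.List.pyRange 0 (D + 1) 1).map (fun k => pvGetI prev k - c * k)).length : Nat) : Int) = D + 1 := by
      simp [PySem.List.length_pyRange_one]; omega
    have hlenPrev : ((prev.length : Nat) : Int) = D + 1 := by omega
    have hPq : ∀ u, 0 ≤ u → u ≤ D → LArg (fun k => pvGetI prev k - c * k) 0 u
        (pvGetP (fwdScan ((PySem.List.pyRange 0 (D + 1) 1).map (fun k => pvGetI prev k - c * k)) (fun k => k == 0)) u) := by
      intro u hu0 huD
      have := fwdScan_spec _ (fun k => k == 0) (fun k => pvGetI prev k - c * k) (fun _ => 0) (D + 1)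
        hlenMap (fun k hk0 hkL => pvGetI_map_pyRange _ (D + 1) k hk0 hkL)
        (by simp)
        (fun k _ _ hr => by simpa using (beq_iff_eq.mp hr).symm)
        (fun k _ _ _ => rfl)
        (fun k hk0 _ => hk0)
        u hu0 (by omega)
      simpa using this
    have hFq : ∀ u, 0 ≤ u → u ≤ D → LArg (fun k => pvGetI prev k) 0 u
        (pvGetP (fwdScan prev (fun k => k == 0)) u) := by
      intro u hu0 huD
      have := fwdScan_spec prev (fun k => k == 0) (fun k => pvGetI prev k) (fun _ => 0) (D + 1)
        hlenPrev (fun k _ _ => rfl)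
        (by simp)
        (fun k _ _ hr => by simpa using (beq_iff_eq.mp hr).symm)
        (fun k _ _ _ => rfl)
        (fun k hk0 _ => hk0)
        u hu0 (by omega)
      simpa using this
    have hSq : ∀ u, 0 ≤ u → u ≤ D → LArg (fun k => pvGetI prev k) u D
        (pvGetP (bwdScan prev (fun k => k == D)) u) := by
      intro u hu0 huD
      have := bwdScan_spec prev (fun k => k == D) (fun k => pvGetI prev k) (fun _ => D) (D + 1)
        hlenPrev (by omega) (fun k _ _ => rfl)
        (by rw [show D + 1 - 1 = D by ring]; exact beq_self_eq_true D)
        (fun k _ _ hr => by simpa using (beq_iff_eq.mp hr).symm)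
        (fun k _ _ _ => rfl)
        (fun k _ hkL => by show k ≤ D; omega)
        u hu0 (by omega)
      simpa using this
    have hBPq : ∀ u, 0 ≤ u → u ≤ D → LArg (fun k => pvGetI prev k) (Bqv * (u / Bqv)) u
        (pvGetP (fwdScan prev (fun k => PySem.Int.mod k Bqv == 0)) u) := by
      intro u hu0 huD
      have := fwdScan_spec prev (fun k => PySem.Int.mod k Bqv == 0) (fun k => pvGetI prev k)
        (fun k => Bqv * (k / Bqv)) (D + 1)
        hlenPrev (fun k _ _ => rfl)
        (by show (PySem.Int.mod 0 Bqv == 0) = true; rw [PySem.Int.mod_eq_emod_of_pos hBqpos]; simp)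
        (fun k _ _ hr => by
          have hr2 : (PySem.Int.mod k Bqv == 0) = true := hr
          rw [PySem.Int.mod_eq_emod_of_pos hBqpos] at hr2
          have hmod : k % Bqv = 0 := beq_iff_eq.mp hr2
          have hk := Int.ediv_add_emod k Bqv
          show Bqv * (k / Bqv) = k
          linarith)
        (fun k hk0 _ hr => by
          have hr2 : (PySem.Int.mod k Bqv == 0) = false := hr
          rw [PySem.Int.mod_eq_emod_of_pos hBqpos] at hr2
          have hmodne : k % Bqv ≠ 0 := by simpa using hr2
          have hk := Int.ediv_add_emod k Bqv
          have hr0 : 0 ≤ k % Bqv := Int.emod_nonneg k (by omega)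
          have hrB : k % Bqv < Bqv := Int.emod_lt_of_pos k hBqpos
          show Bqv * (k / Bqv) = Bqv * ((k - 1) / Bqv)
          have hdiv : (k - 1) / Bqv = k / Bqv := by
            rw [show k - 1 = (k % Bqv - 1) + Bqv * (k / Bqv) by linarith]
            exact ediv_shift k Bqv hBqpos (k % Bqv - 1)
              (by
                rcases lt_or_ge 0 (k % Bqv) with h | h
                · omega
                · exact absurd (by omega) hmodne)
              (by omega)
          rw [hdiv])
        (fun k hk0 _ => by
          have hk := Int.ediv_add_emod k Bqv
          have hr0 : 0 ≤ k % Bqv := Int.emod_nonneg k (by omega)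
          linarith)
        u hu0 (by omega)
      simpa using this
    have hBSq : ∀ u, 0 ≤ u → u ≤ D → LArg (fun k => pvGetI prev k) u
        (min D (Bqv * (u / Bqv) + Bqv - 1))
        (pvGetP (bwdScan prev (fun k => k == D || PySem.Int.mod k Bqv == Bqv - 1)) u) := by
      intro u hu0 huD
      have := bwdScan_spec prev (fun k => k == D || PySem.Int.mod k Bqv == Bqv - 1)
        (fun k => pvGetI prev k) (fun k => min D (Bqv * (k / Bqv) + Bqv - 1)) (D + 1)
        hlenPrev (by omega) (fun k _ _ => rfl)
        (by rw [show D + 1 - 1 = D by ring]; simp)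
        (fun k hk0 hkL hr => by
          have hk := Int.ediv_add_emod k Bqv
          have hr0 : 0 ≤ k % Bqv := Int.emod_nonneg k (by omega)
          have hrB : k % Bqv < Bqv := Int.emod_lt_of_pos k hBqpos
          have hr2 : ((k == D) || (PySem.Int.mod k Bqv == Bqv - 1)) = true := hr
          rcases Bool.or_eq_true_iff.mp hr2 with h | h
          · have hkD : k = D := beq_iff_eq.mp h
            subst hkD
            show min k (Bqv * (k / Bqv) + Bqv - 1) = k
            exact min_eq_left (by linarith)
          · rw [PySem.Int.mod_eq_emod_of_pos hBqpos] at h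
            have hmod : k % Bqv = Bqv - 1 := beq_iff_eq.mp h
            show min D (Bqv * (k / Bqv) + Bqv - 1) = k
            rw [show Bqv * (k / Bqv) + Bqv - 1 = k by linarith]
            exact min_eq_right (by omega)
        )
        (fun k hk0 hkL hr => by
          have hr2 : ((k == D) || (PySem.Int.mod k Bqv == Bqv - 1)) = false := hr
          rw [Bool.or_eq_false_iff] at hr2
          obtain ⟨hrD, hrm⟩ := hr2
          rw [PySem.Int.mod_eq_emod_of_pos hBqpos] at hrm
          have hmodne : k % Bqv ≠ Bqv - 1 := by simpa using hrm
          have hk := Int.ediv_add_emod k Bqv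
          have hr0 : 0 ≤ k % Bqv := Int.emod_nonneg k (by omega)
          have hrB : k % Bqv < Bqv := Int.emod_lt_of_pos k hBqpos
          show min D (Bqv * (k / Bqv) + Bqv - 1) = min D (Bqv * ((k + 1) / Bqv) + Bqv - 1)
          have hdiv : (k + 1) / Bqv = k / Bqv := by
            rw [show k + 1 = (k % Bqv + 1) + Bqv * (k / Bqv) by linarith]
            exact ediv_shift k Bqv hBqpos (k % Bqv + 1) (by omega)
              (by
                rcases lt_or_ge (k % Bqv) (Bqv - 1) with h | h
                · omega
                · exact absurd (by omega) hmodne)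
          rw [hdiv])
        (fun k hk0 hkL => by
          have hk := Int.ediv_add_emod k Bqv
          have hrB : k % Bqv < Bqv := Int.emod_lt_of_pos k hBqpos
          exact le_min (by omega) (by linarith))
        u hu0 (by omega)
      simpa using this
    have hE0 : 0 ≤ Ev := by rw [hEv]; split_ifs <;> omega
    have hED : Ev ≤ D := by rw [hEv]; split_ifs <;> omega
    have hEvc : Ev = min D (di + j) ∧ 0 ≤ min D (di + j) ∨ Ev = 0 ∧ min D (di + j) < 0 := by
      rw [hEv]; split_ifs with h
      · exact Or.inr ⟨rfl, h⟩
      · exact Or.inl ⟨rfl, by omega⟩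
    have htE : tv ≤ Ev := min_le_right _ _
    have hwidth : 0 ≤ tv → tv + 1 ≤ Ev → Ev < D → Ev = tv + Bqv := by
      intro h1 h2 h3
      rw [hBqv]
      rcases hEvc with ⟨he, hnn⟩ | ⟨he, hneg⟩
      · have hm : 1 ≤ m := by omega
        rw [if_pos hm]; omega
      · omega
    have hglow : 0 ≤ tv → ∀ k, 0 ≤ k → k ≤ tv →
        (fun k => pvGetI prev k + max 0 (c * (di + j - m - k))) k
          = (fun k => pvGetI prev k - c * k) k + c * xv := by
      intro _ k hk0 hkt
      have hkx : k ≤ xv := by omega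
      show pvGetI prev k + max 0 (c * (di + j - m - k)) = (pvGetI prev k - c * k) + c * xv
      rw [max_eq_right (mul_nonneg hc (by omega)), hxv]
      ring
    have hghigh : 0 ≤ tv → tv + 1 ≤ Ev → ∀ k, tv + 1 ≤ k → k ≤ Ev →
        (fun k => pvGetI prev k + max 0 (c * (di + j - m - k))) k
          = (fun k => pvGetI prev k) k + 0 := by
      intro ht0 hta k hk1 hkE
      have hkx : xv + 1 ≤ k := by omega
      show pvGetI prev k + max 0 (c * (di + j - m - k)) = pvGetI prev k + 0
      rw [max_eq_left (mul_nonpos_iff.mpr (Or.inl ⟨hc, by omega⟩))]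
    have hlow0 : tv < 0 → ∀ k, 0 ≤ k → k ≤ Ev →
        (fun k => pvGetI prev k + max 0 (c * (di + j - m - k))) k
          = (fun k => pvGetI prev k) k + 0 := by
      intro ht0 k hk0 hkE
      have hkx : xv < k + 1 := by omega
      show pvGetI prev k + max 0 (c * (di + j - m - k)) = pvGetI prev k + 0
      rw [max_eq_left (mul_nonpos_iff.mpr (Or.inl ⟨hc, by omega⟩))]
    have hq := query_LArg (fun k => pvGetI prev k + max 0 (c * (di + j - m - k)))
      (fun k => pvGetI prev k - c * k) (fun k => pvGetI prev k)
      D Bqv Ev tv (c * xv) 0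
      (fwdScan ((PySem.List.pyRange 0 (D + 1) 1).map (fun k => pvGetI prev k - c * k)) (fun k => k == 0))
      (fwdScan prev (fun k => k == 0))
      (bwdScan prev (fun k => k == D))
      (fwdScan prev (fun k => PySem.Int.mod k Bqv == 0))
      (bwdScan prev (fun k => k == D || PySem.Int.mod k Bqv == Bqv - 1))
      hBq1 hE0 hED htE hwidth hglow hghigh hlow0 hPq hFq hSq hBPq hBSq
    have hcell := cellV_LArg prev di D m c j
    rw [← hEv] at hcell
    have hfinal := LArg_offset (cellG prev di m c j)
      (fun k => pvGetI prev k + max 0 (c * (di + j - m - k))) 0 Ev j _ hq (fun k _ _ => rfl)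
    exact LArg_unique (cellG prev di m c j) 0 Ev _ _ hfinal hcell
  · simp only [if_neg hc]
    have hcneg : c ≤ 0 := by omega
    set Ev : Int := if min D (di + j) < 0 then 0 else min D (di + j) with hEv
    set Bqv : Int := if 1 ≤ m + 1 then m + 1 else 1 with hBqv
    set xv : Int := di + j - m with hxv
    set tv : Int := min (xv - 1) Ev with htv
    have hBq1 : (1:Int) ≤ Bqv := by rw [hBqv]; split_ifs <;> omega
    have hBqpos : (0:Int) < Bqv := by omega
    have hlenMap : ((((PySem.List.pyRange 0 (D + 1) 1).map (fun k => pvGetI prev k - c * k)).length : Nat) : Int) = D + 1 := by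
      simp [PySem.List.length_pyRange_one]; omega
    have hlenPrev : ((prev.length : Nat) : Int) = D + 1 := by omega
    have hgHigh : ∀ k, 0 ≤ k → k < D + 1 →
        pvGetI ((PySem.List.pyRange 0 (D + 1) 1).map (fun k => pvGetI prev k - c * k)) k
          = (fun k => pvGetI prev k - c * k) k :=
      fun k hk0 hkL => pvGetI_map_pyRange _ (D + 1) k hk0 hkL
    have hPq : ∀ u, 0 ≤ u → u ≤ D → LArg (fun k => pvGetI prev k) 0 u
        (pvGetP (fwdScan prev (fun k => k == 0)) u) := by
      intro u hu0 huD
      have := fwdScan_spec prev (fun k => k == 0) (fun k => pvGetI prev k) (fun _ => 0) (D + 1)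
        hlenPrev (fun k _ _ => rfl)
        (by simp)
        (fun k _ _ hr => by simpa using (beq_iff_eq.mp hr).symm)
        (fun k _ _ _ => rfl)
        (fun k hk0 _ => hk0)
        u hu0 (by omega)
      simpa using this
    have hFq : ∀ u, 0 ≤ u → u ≤ D → LArg (fun k => pvGetI prev k - c * k) 0 u
        (pvGetP (fwdScan ((PySem.List.pyRange 0 (D + 1) 1).map (fun k => pvGetI prev k - c * k)) (fun k => k == 0)) u) := by
      intro u hu0 huD
      have := fwdScan_spec _ (fun k => k == 0) (fun k => pvGetI prev k - c * k) (fun _ => 0) (D + 1)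
        hlenMap hgHigh
        (by simp)
        (fun k _ _ hr => by simpa using (beq_iff_eq.mp hr).symm)
        (fun k _ _ _ => rfl)
        (fun k hk0 _ => hk0)
        u hu0 (by omega)
      simpa using this
    have hSq : ∀ u, 0 ≤ u → u ≤ D → LArg (fun k => pvGetI prev k - c * k) u D
        (pvGetP (bwdScan ((PySem.List.pyRange 0 (D + 1) 1).map (fun k => pvGetI prev k - c * k)) (fun k => k == D)) u) := by
      intro u hu0 huD
      have := bwdScan_spec _ (fun k => k == D) (fun k => pvGetI prev k - c * k) (fun _ => D) (D + 1)
        hlenMap (by omega) hgHigh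
        (by rw [show D + 1 - 1 = D by ring]; exact beq_self_eq_true D)
        (fun k _ _ hr => by simpa using (beq_iff_eq.mp hr).symm)
        (fun k _ _ _ => rfl)
        (fun k _ hkL => by show k ≤ D; omega)
        u hu0 (by omega)
      simpa using this
    have hBPq : ∀ u, 0 ≤ u → u ≤ D → LArg (fun k => pvGetI prev k - c * k) (Bqv * (u / Bqv)) u
        (pvGetP (fwdScan ((PySem.List.pyRange 0 (D + 1) 1).map (fun k => pvGetI prev k - c * k)) (fun k => PySem.Int.mod k Bqv == 0)) u) := by
      intro u hu0 huD
      have := fwdScan_spec _ (fun k => PySem.Int.mod k Bqv == 0) (fun k => pvGetI prev k - c * k)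
        (fun k => Bqv * (k / Bqv)) (D + 1)
        hlenMap hgHigh
        (by show (PySem.Int.mod 0 Bqv == 0) = true; rw [PySem.Int.mod_eq_emod_of_pos hBqpos]; simp)
        (fun k _ _ hr => by
          have hr2 : (PySem.Int.mod k Bqv == 0) = true := hr
          rw [PySem.Int.mod_eq_emod_of_pos hBqpos] at hr2
          have hmod : k % Bqv = 0 := beq_iff_eq.mp hr2
          have hk := Int.ediv_add_emod k Bqv
          show Bqv * (k / Bqv) = k
          linarith)
        (fun k hk0 _ hr => by
          have hr2 : (PySem.Int.mod k Bqv == 0) = false := hr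
          rw [PySem.Int.mod_eq_emod_of_pos hBqpos] at hr2
          have hmodne : k % Bqv ≠ 0 := by simpa using hr2
          have hk := Int.ediv_add_emod k Bqv
          have hr0 : 0 ≤ k % Bqv := Int.emod_nonneg k (by omega)
          have hrB : k % Bqv < Bqv := Int.emod_lt_of_pos k hBqpos
          show Bqv * (k / Bqv) = Bqv * ((k - 1) / Bqv)
          have hdiv : (k - 1) / Bqv = k / Bqv := by
            rw [show k - 1 = (k % Bqv - 1) + Bqv * (k / Bqv) by linarith]
            exact ediv_shift k Bqv hBqpos (k % Bqv - 1)
              (by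
                rcases lt_or_ge 0 (k % Bqv) with h | h
                · omega
                · exact absurd (by omega) hmodne)
              (by omega)
          rw [hdiv])
        (fun k hk0 _ => by
          have hk := Int.ediv_add_emod k Bqv
          have hr0 : 0 ≤ k % Bqv := Int.emod_nonneg k (by omega)
          linarith)
        u hu0 (by omega)
      simpa using this
    have hBSq : ∀ u, 0 ≤ u → u ≤ D → LArg (fun k => pvGetI prev k - c * k) u
        (min D (Bqv * (u / Bqv) + Bqv - 1))
        (pvGetP (bwdScan ((PySem.List.pyRange 0 (D + 1) 1).map (fun k => pvGetI prev k - c * k)) (fun k => k == D || PySem.Int.mod k Bqv == Bqv - 1)) u) := by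
      intro u hu0 huD
      have := bwdScan_spec _ (fun k => k == D || PySem.Int.mod k Bqv == Bqv - 1)
        (fun k => pvGetI prev k - c * k) (fun k => min D (Bqv * (k / Bqv) + Bqv - 1)) (D + 1)
        hlenMap (by omega) hgHigh
        (by rw [show D + 1 - 1 = D by ring]; simp)
        (fun k hk0 hkL hr => by
          have hk := Int.ediv_add_emod k Bqv
          have hr0 : 0 ≤ k % Bqv := Int.emod_nonneg k (by omega)
          have hrB : k % Bqv < Bqv := Int.emod_lt_of_pos k hBqpos
          have hr2 : ((k == D) || (PySem.Int.mod k Bqv == Bqv - 1)) = true := hr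
          rcases Bool.or_eq_true_iff.mp hr2 with h | h
          · have hkD : k = D := beq_iff_eq.mp h
            subst hkD
            show min k (Bqv * (k / Bqv) + Bqv - 1) = k
            exact min_eq_left (by linarith)
          · rw [PySem.Int.mod_eq_emod_of_pos hBqpos] at h
            have hmod : k % Bqv = Bqv - 1 := beq_iff_eq.mp h
            show min D (Bqv * (k / Bqv) + Bqv - 1) = k
            rw [show Bqv * (k / Bqv) + Bqv - 1 = k by linarith]
            exact min_eq_right (by omega)
        )
        (fun k hk0 hkL hr => by
          have hr2 : ((k == D) || (PySem.Int.mod k Bqv == Bqv - 1)) = false := hr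
          rw [Bool.or_eq_false_iff] at hr2
          obtain ⟨hrD, hrm⟩ := hr2
          rw [PySem.Int.mod_eq_emod_of_pos hBqpos] at hrm
          have hmodne : k % Bqv ≠ Bqv - 1 := by simpa using hrm
          have hk := Int.ediv_add_emod k Bqv
          have hr0 : 0 ≤ k % Bqv := Int.emod_nonneg k (by omega)
          have hrB : k % Bqv < Bqv := Int.emod_lt_of_pos k hBqpos
          show min D (Bqv * (k / Bqv) + Bqv - 1) = min D (Bqv * ((k + 1) / Bqv) + Bqv - 1)
          have hdiv : (k + 1) / Bqv = k / Bqv := by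
            rw [show k + 1 = (k % Bqv + 1) + Bqv * (k / Bqv) by linarith]
            exact ediv_shift k Bqv hBqpos (k % Bqv + 1) (by omega)
              (by
                rcases lt_or_ge (k % Bqv) (Bqv - 1) with h | h
                · omega
                · exact absurd (by omega) hmodne)
          rw [hdiv])
        (fun k hk0 hkL => by
          have hk := Int.ediv_add_emod k Bqv
          have hrB : k % Bqv < Bqv := Int.emod_lt_of_pos k hBqpos
          exact le_min (by omega) (by linarith))
        u hu0 (by omega)
      simpa using this
    have hE0 : 0 ≤ Ev := by rw [hEv]; split_ifs <;> omega
    have hED : Ev ≤ D := by rw [hEv]; split_ifs <;> omega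
    have hEvc : Ev = min D (di + j) ∧ 0 ≤ min D (di + j) ∨ Ev = 0 ∧ min D (di + j) < 0 := by
      rw [hEv]; split_ifs with h
      · exact Or.inr ⟨rfl, h⟩
      · exact Or.inl ⟨rfl, by omega⟩
    have htE : tv ≤ Ev := min_le_right _ _
    have hwidth : 0 ≤ tv → tv + 1 ≤ Ev → Ev < D → Ev = tv + Bqv := by
      intro h1 h2 h3
      rw [hBqv]
      rcases hEvc with ⟨he, hnn⟩ | ⟨he, hneg⟩
      · rw [if_pos (by omega)]; omega
      · omega
    have hglow : 0 ≤ tv → ∀ k, 0 ≤ k → k ≤ tv →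
        (fun k => pvGetI prev k + max 0 (c * (di + j - m - k))) k
          = (fun k => pvGetI prev k) k + 0 := by
      intro _ k hk0 hkt
      have hkx : k ≤ xv - 1 := by omega
      show pvGetI prev k + max 0 (c * (di + j - m - k)) = pvGetI prev k + 0
      rw [max_eq_left (mul_nonpos_iff.mpr (Or.inr ⟨hcneg, by omega⟩))]
    have hghigh : 0 ≤ tv → tv + 1 ≤ Ev → ∀ k, tv + 1 ≤ k → k ≤ Ev →
        (fun k => pvGetI prev k + max 0 (c * (di + j - m - k))) k
          = (fun k => pvGetI prev k - c * k) k + c * xv := by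
      intro ht0 hta k hk1 hkE
      have hkx : xv ≤ k := by omega
      show pvGetI prev k + max 0 (c * (di + j - m - k)) = (pvGetI prev k - c * k) + c * xv
      rw [max_eq_right (mul_nonneg_iff.mpr (Or.inr ⟨hcneg, by omega⟩)), hxv]
      ring
    have hlow0 : tv < 0 → ∀ k, 0 ≤ k → k ≤ Ev →
        (fun k => pvGetI prev k + max 0 (c * (di + j - m - k))) k
          = (fun k => pvGetI prev k - c * k) k + c * xv := by
      intro ht0 k hk0 hkE
      have hkx : xv ≤ k := by omega
      show pvGetI prev k + max 0 (c * (di + j - m - k)) = (pvGetI prev k - c * k) + c * xv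
      rw [max_eq_right (mul_nonneg_iff.mpr (Or.inr ⟨hcneg, by omega⟩)), hxv]
      ring
    have hq := query_LArg (fun k => pvGetI prev k + max 0 (c * (di + j - m - k)))
      (fun k => pvGetI prev k) (fun k => pvGetI prev k - c * k)
      D Bqv Ev tv 0 (c * xv)
      (fwdScan prev (fun k => k == 0))
      (fwdScan ((PySem.List.pyRange 0 (D + 1) 1).map (fun k => pvGetI prev k - c * k)) (fun k => k == 0))
      (bwdScan ((PySem.List.pyRange 0 (D + 1) 1).map (fun k => pvGetI prev k - c * k)) (fun k => k == D))
      (fwdScan ((PySem.List.pyRange 0 (D + 1) 1).map (fun k => pvGetI prev k - c * k)) (fun k => PySem.Int.mod k Bqv == 0))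
      (bwdScan ((PySem.List.pyRange 0 (D + 1) 1).map (fun k => pvGetI prev k - c * k)) (fun k => k == D || PySem.Int.mod k Bqv == Bqv - 1))
      hBq1 hE0 hED htE hwidth hglow hghigh hlow0 hPq hFq hSq hBPq hBSq
    have hcell := cellV_LArg prev di D m c j
    rw [← hEv] at hcell
    have hfinal := LArg_offset (cellG prev di m c j)
      (fun k => pvGetI prev k + max 0 (c * (di + j - m - k))) 0 Ev j _ hq (fun k _ _ => rfl)
    exact LArg_unique (cellG prev di m c j) 0 Ev _ _ hfinal hcell

-- B's row fold is the map of its per-j cell computation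
theorem foldl_append_pair (f g : Int → Int) (l : List Int) :
    ∀ (A B : List Int),
      l.foldl (fun (ra : List Int × List Int) j => (ra.1 ++ [f j], ra.2 ++ [g j])) (A, B)
        = (A ++ l.map f, B ++ l.map g) := by
  induction l with
  | nil => intro A B; simp
  | cons x xs ih =>
    intro A B
    simp only [List.foldl_cons, ih (A ++ [f x]) (B ++ [g x]), List.map_cons]
    simp [List.append_assoc]

theorem buildC_prev_len (d : List Int) (D m c : Int) (hD : 0 ≤ D) :
    ∀ t : Nat, (buildC d D m c t).2.2.length = (D + 1).toNat := by
  intro t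
  cases t with
  | zero => simp [buildC, row0V, PySem.List.length_pyRange_one]
  | succ t => simp [buildC, PySem.List.length_pyRange_one]

theorem B_outer (d : List Int) (D m c : Int) (hD : 0 ≤ D) :
    ∀ N : Nat,
    (PySem.List.pyRange 1 (1 + (N : Int)) 1).foldl
        (fun (st : List (List Int) × List (List Int) × List Int) i =>
          let prev := st.2.2
          let di := pvGetI d i
          let lhw : List Int × List Int × Int :=
            if 0 ≤ c then ((PySem.List.pyRange 0 (D + 1) 1).map (fun k => pvGetI prev k - c * k), prev, m)
            else (prev, (PySem.List.pyRange 0 (D + 1) 1).map (fun k => pvGetI prev k - c * k), m + 1)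
          let low := lhw.1
          let high := lhw.2.1
          let w := lhw.2.2
          let Bq := if 1 ≤ w then w else 1
          let P := fwdScan low (fun k => k == 0)
          let F := fwdScan high (fun k => k == 0)
          let S := bwdScan high (fun k => k == D)
          let BP := fwdScan high (fun k => PySem.Int.mod k Bq == 0)
          let BS := bwdScan high (fun k => k == D || PySem.Int.mod k Bq == Bq - 1)
          let ra :=
            (PySem.List.pyRange 0 (D + 1) 1).foldl
              (fun (ra : List Int × List Int) j =>
                let M := di + j
                let x := M - m
                let E0 := min D M
                let E := if E0 < 0 then 0 else E0
                let t := if 0 ≤ c then min x E else min (x - 1) E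
                let offl := if 0 ≤ c then c * x else 0
                let offh := if 0 ≤ c then 0 else c * x
                let bp : Int × Int :=
                  if t < 0 then
                    let f := pvGetP F E
                    (f.1 + offh, f.2)
                  else
                    let p := pvGetP P t
                    let bp0 : Int × Int := (p.1 + offl, p.2)
                    let a := t + 1
                    if a ≤ E then
                      let hh : Int × Int :=
                        if E == D then pvGetP S a
                        else
                          let bs := pvGetP BS a
                          let bp2 := pvGetP BP E
                          if bp2.1 < bs.1 then bp2 else bs
                      let hh' : Int × Int := (hh.1 + offh, hh.2)
                      if hh'.1 < bp0.1 then hh' else bp0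
                    else bp0
                (ra.1 ++ [bp.1 + j], ra.2 ++ [bp.2]))
              ([], [])
          (st.1 ++ [ra.1], st.2.1 ++ [ra.2], ra.1))
        ([row0V d D m c], [initRow D], row0V d D m c)
    = buildC d D m c N := by
  intro N
  induction N with
  | zero =>
    rw [show (PySem.List.pyRange 1 (1 + ((0 : Nat) : Int)) 1) = []
        from PySem.List.pyRange_one_eq_nil (by norm_num)]
    rfl
  | succ N ih =>
    rw [show PySem.List.pyRange 1 (1 + ((N + 1 : Nat) : Int)) 1
        = PySem.List.pyRange 1 (1 + (N : Int)) 1 ++ [1 + (N : Int)] by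
      rw [show (1 + ((N + 1 : Nat) : Int)) = (1 + (N : Int)) + 1 by push_cast; ring]
      exact PySem.List.pyRange_one_succ_right (by omega)]
    rw [List.foldl_append, ih]
    simp only [List.foldl_cons, List.foldl_nil]
    rw [foldl_append_pair]
    simp only [List.nil_append]
    have hlenprev : (buildC d D m c N).2.2.length = (D + 1).toNat := buildC_prev_len d D m c hD N
    rw [show buildC d D m c (N + 1)
        = ((buildC d D m c N).1 ++ [(PySem.List.pyRange 0 (D + 1) 1).map
              (fun j => (cellV (buildC d D m c N).2.2 (pvGetI d ((N : Int) + 1)) D m c j).1)],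
           (buildC d D m c N).2.1 ++ [(PySem.List.pyRange 0 (D + 1) 1).map
              (fun j => (cellV (buildC d D m c N).2.2 (pvGetI d ((N : Int) + 1)) D m c j).2)],
           (PySem.List.pyRange 0 (D + 1) 1).map
              (fun j => (cellV (buildC d D m c N).2.2 (pvGetI d ((N : Int) + 1)) D m c j).1)) from rfl]
    rw [show ((N : Int) + 1) = 1 + (N : Int) by ring]
    refine Prod.ext ?_ (Prod.ext ?_ ?_)
    · show _ ++ _ = _ ++ _
      congr 1
      congr 1
      apply List.map_congr_left
      intro j hj
      obtain ⟨hj0, hjD⟩ := PySem.List.mem_pyRange_one.mp hj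
      have h := cellAlt_eq (buildC d D m c N).2.2 D m c (pvGetI d (1 + (N : Int))) j hD hlenprev hj0 (by omega)
      exact (Prod.ext_iff.mp h).1
    · show _ ++ _ = _ ++ _
      congr 1
      congr 1
      apply List.map_congr_left
      intro j hj
      obtain ⟨hj0, hjD⟩ := PySem.List.mem_pyRange_one.mp hj
      have h := cellAlt_eq (buildC d D m c N).2.2 D m c (pvGetI d (1 + (N : Int))) j hD hlenprev hj0 (by omega)
      exact (Prod.ext_iff.mp h).2
    · show List.map _ _ = List.map _ _
      apply List.map_congr_left
      intro j hj
      obtain ⟨hj0, hjD⟩ := PySem.List.mem_pyRange_one.mp hj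
      have h := cellAlt_eq (buildC d D m c N).2.2 D m c (pvGetI d (1 + (N : Int))) j hD hlenprev hj0 (by omega)
      exact (Prod.ext_iff.mp h).1

theorem plan_inventory_alt_eq_build (d : List Int) (D n m c : Int) (hn : 1 ≤ n) (hD : 0 ≤ D) :
    plan_inventory_alt d D n m c = ((buildC d D m c (n - 1).toNat).1, (buildC d D m c (n - 1).toNat).2.1) := by
  have h := B_outer d D m c hD (n - 1).toNat
  rw [show (1 + (((n - 1).toNat : Nat) : Int)) = n by omega] at h
  exact congrArg (fun st : List (List Int) × List (List Int) × List Int => (st.1, st.2.1)) h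

-- ===== VERDICT (by name: the statement is the Claim_ definition above) =====
theorem plan_inventory_spec : Claim_equal_plan_inventory := by
  intro d D n m c _hdom hpre
  obtain ⟨hn, _hlen, hD⟩ := hpre
  unfold Spec_plan_inventory
  rw [plan_inventory_eq_build d D n m c hn hD, plan_inventory_alt_eq_build d D n m c hn hD]
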